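-- pv_equiv track=rewrite | github.com/shunsuke-toba/kaggle-google-code-golf-2025 | 367/2_plain_code.py | p
-- ===== SOURCE A (Python) =====
-- def p(grid):
--     import copy
--     g = copy.deepcopy(grid)
--     H, W = len(g), len(g[0])
--
--     # 0の連結成分を見つけて、各成分が長方形かつ条件を満たすかチェック
--     visited = [[False] * W for _ in range(H)]
--
--     for r in range(H):
--         for c in range(W):
--             if g[r][c] == 0 and not visited[r][c]:
--                 # 連結成分を見つける
--                 component = []
--                 stack = [(r, c)]
--                 while stack:
--                     cr, cc = stack.pop()
--                     if visited[cr][cc]: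
--                         continue
--                     visited[cr][cc] = True
--                     component.append((cr, cc))
--
--                     for dr, dc in [(-1, 0), (1, 0), (0, -1), (0, 1)]:
--                         nr, nc = cr + dr, cc + dc
--                         if (0 <= nr < H and 0 <= nc < W and
--                             g[nr][nc] == 0 and not visited[nr][nc]):
--                             stack.append((nr, nc))
--
--                 # この連結成分が長方形かどうかチェック（1マスも含む）
--                 if len(component) > 0:
--                     min_r = min(pos[0] for pos in component)
--                     max_r = max(pos[0] for pos in component)
--                     min_c = min(pos[1] for pos in component)
--                     max_c = max(pos[1] for pos in component)
--
--                     # 長方形の場合、面積が一致するはず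
--                     expected_area = (max_r - min_r + 1) * (max_c - min_c + 1)
--                     if len(component) == expected_area:
--                         # 各隅の特定の斜め隣接マスが5で、その5のマスの隣接する5のマスが2つかチェック
--                         should_convert = False
--
--                         # 各隅に対応する斜め方向のみをチェック
--                         diagonal_checks = [
--                             (min_r, min_c, -1, -1),  # 左上の隅の左上斜め
--                             (min_r, max_c, -1, 1),   # 右上の隅の右上斜め
--                             (max_r, min_c, 1, -1),   # 左下の隅の左下斜め
--                             (max_r, max_c, 1, 1)     # 右下の隅の右下斜め
--                         ]
--
--                         for corner_r, corner_c, dr, dc in diagonal_checks: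
--                             nr, nc = corner_r + dr, corner_c + dc
--                             if (0 <= nr < H and 0 <= nc < W and g[nr][nc] == 5):
--                                 # この5のマスの隣接する5のマスの数をカウント
--                                 adjacent_5_count = 0
--                                 for adr, adc in [(-1, 0), (1, 0), (0, -1), (0, 1)]:
--                                     anr, anc = nr + adr, nc + adc
--                                     if (0 <= anr < H and 0 <= anc < W and g[anr][anc] == 5):
--                                         adjacent_5_count += 1
--
--                                 if adjacent_5_count == 2:
--                                     should_convert = True
--                                     break
--
--                         if should_convert:
--                             # この長方形領域を4に変更
--                             for cr, cc in component:
--                                 g[cr][cc] = 4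
--
--     return g
-- ===== SOURCE B (Python) =====
-- def p(grid):
--     H, W = len(grid), len(grid[0])
--
--     def val(r, c):
--         # grid value at (r, c), or None when out of bounds
--         return grid[r][c] if 0 <= r < H and 0 <= c < W else None
--
--     def corner_ok(r1, c1, r2, c2):
--         # the four diagonal-5 probes
--         for cr, cc, dr, dc in ((r1, c1, -1, -1), (r1, c2, -1, 1),
--                                (r2, c1, 1, -1), (r2, c2, 1, 1)):
--             nr, nc = cr + dr, cc + dc
--             if val(nr, nc) == 5:
--                 adj = sum(1 for ar, ac in ((nr - 1, nc), (nr + 1, nc),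
--                                            (nr, nc - 1), (nr, nc + 1))
--                           if val(ar, ac) == 5)
--                 if adj == 2:
--                     return True
--         return False
--
--     paint = set()
--     for r in range(H):
--         for c in range(W):
--             # only top-left corners of candidate rectangles
--             if grid[r][c] == 0 and val(r, c - 1) != 0 and val(r - 1, c) != 0:
--                 c2 = c
--                 while val(r, c2 + 1) == 0:
--                     c2 += 1
--                 r2 = r
--                 while val(r2 + 1, c) == 0:
--                     r2 += 1
--                 filled = all(grid[i][j] == 0
--                              for i in range(r, r2 + 1) for j in range(c, c2 + 1))
--                 sealed = (all(val(r - 1, j) != 0 and val(r2 + 1, j) != 0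
--                               for j in range(c, c2 + 1)) and
--                           all(val(i, c - 1) != 0 and val(i, c2 + 1) != 0
--                               for i in range(r, r2 + 1)))
--                 if filled and sealed and corner_ok(r, c, r2, c2):
--                     for i in range(r, r2 + 1):
--                         for j in range(c, c2 + 1):
--                             paint.add((i, j))
--     return [[4 if (r, c) in paint else v for c, v in enumerate(row)]
--             for r, row in enumerate(grid)]
-- ===== Notes on version B (the rewrite author's own statement) =====
-- stated objective: alternative
-- what changed: replaces the DFS flood-fill over a visited matrix and in-place painting of a deepcopy by a direct scan for top-left corners of sealed rectangles of zeros (row/column extent runs plus filled-interior and sealed-border checks) and a functional rebuild of the grid from a paint set; Pre_ excludes the empty grid and grids with a row shorter than row 0, on which A raises IndexError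
import Mathlib
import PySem

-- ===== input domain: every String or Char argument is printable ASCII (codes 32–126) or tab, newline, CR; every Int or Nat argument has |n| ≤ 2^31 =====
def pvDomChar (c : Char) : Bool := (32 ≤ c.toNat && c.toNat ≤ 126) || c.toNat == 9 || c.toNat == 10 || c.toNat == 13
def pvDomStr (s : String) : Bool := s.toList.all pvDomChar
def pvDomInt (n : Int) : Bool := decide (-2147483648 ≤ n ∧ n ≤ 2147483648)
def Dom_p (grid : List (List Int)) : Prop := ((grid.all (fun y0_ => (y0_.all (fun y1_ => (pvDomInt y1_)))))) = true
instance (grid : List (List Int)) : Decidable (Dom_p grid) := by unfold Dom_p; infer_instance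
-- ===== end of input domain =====

-- B replaces A's flood-fill/visited-matrix component search by a direct scan for the
-- top-left corners of sealed rectangles of zeros (no DFS, no visited matrix, no deepcopy).
-- A only mutates its own deepcopy, so return values are the whole story.

-- ===== PORT A =====
-- value of the matrix g at (r, c); every use in the ports is guarded by 0 ≤ r < H, 0 ≤ c < W
def pvGet (g : List (List Int)) (r c : Int) : Int := (g.getD r.toNat []).getD c.toNat 0

-- g[r][c] = v
def pvSet (g : List (List Int)) (r c : Int) (v : Int) : List (List Int) :=
  g.set r.toNat ((g.getD r.toNat []).set c.toNat v)

-- 0 <= r < H and 0 <= c < W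
def pvInb (H W r c : Int) : Bool :=
  decide (0 ≤ r) && decide (r < H) && decide (0 ≤ c) && decide (c < W)

def pvCells (H W : Int) : Finset (Int × Int) :=
  ((PySem.List.pyRange 0 H 1).product (PySem.List.pyRange 0 W 1)).toFinset

-- A's DFS while-loop; the Python stack's top is the list head, visited is the set of
-- True cells of A's visited matrix.  The `pvInb` test on a popped cell only makes the
-- recursion total: A's stack never holds an out-of-bounds cell.
def pvDfs (g : List (List Int)) (H W : Int) :
    Finset (Int × Int) → List (Int × Int) → List (Int × Int) →
    Finset (Int × Int) × List (Int × Int)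
  | visited, [], comp => (visited, comp)
  | visited, (cr, cc) :: stack, comp =>
    if (cr, cc) ∈ visited then pvDfs g H W visited stack comp
    else if hin : pvInb H W cr cc = true then
      let visited' := insert (cr, cc) visited
      let nbrs := ([((-1 : Int), (0 : Int)), (1, 0), (0, -1), (0, 1)].map
          (fun d => (cr + d.1, cc + d.2))).filter
          (fun q => pvInb H W q.1 q.2 && pvGet g q.1 q.2 == 0 && decide (q ∉ visited'))
      pvDfs g H W visited' (nbrs.reverse ++ stack) (comp ++ [(cr, cc)])
    else (visited, comp)
termination_by visited stack _ => ((pvCells H W \ visited).card, stack.length)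
decreasing_by
  · exact Prod.Lex.right _ (Nat.lt_succ_self _)
  · apply Prod.Lex.left
    apply Finset.card_lt_card
    constructor
    · exact Finset.sdiff_subset_sdiff (Finset.Subset.refl _) (Finset.subset_insert _ _)
    · intro hsub
      have h1 : (cr, cc) ∈ pvCells H W \ visited := by
        simp only [pvInb, Bool.and_eq_true, decide_eq_true_eq] at hin
        simp only [Finset.mem_sdiff, pvCells, List.mem_toFinset, List.pair_mem_product,
          PySem.List.mem_pyRange_one]
        exact ⟨⟨⟨hin.1.1.1, hin.1.1.2⟩, ⟨hin.1.2, hin.2⟩⟩, by assumption⟩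
      have h2 := hsub h1
      simp at h2

-- A's adjacent-5 counting loop
def pvAdj5 (g : List (List Int)) (H W nr nc : Int) : Int :=
  [((-1 : Int), (0 : Int)), (1, 0), (0, -1), (0, 1)].foldl
    (fun acc d =>
      if pvInb H W (nr + d.1) (nc + d.2) && pvGet g (nr + d.1) (nc + d.2) == 5 then acc + 1
      else acc) 0

-- A's loop over the four diagonal corner probes (break = any)
def pvShouldConvert (g : List (List Int)) (H W minr maxr minc maxc : Int) : Bool :=
  [(minr, minc, (-1 : Int), (-1 : Int)), (minr, maxc, -1, 1),
   (maxr, minc, 1, -1), (maxr, maxc, 1, 1)].any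
    (fun t =>
      pvInb H W (t.1 + t.2.2.1) (t.2.1 + t.2.2.2) &&
      pvGet g (t.1 + t.2.2.1) (t.2.1 + t.2.2.2) == 5 &&
      pvAdj5 g H W (t.1 + t.2.2.1) (t.2.1 + t.2.2.2) == 2)

-- body of A's double scan loop at one cell (r, c); state = (g, visited)
def pvScanCell (H W : Int) (st : List (List Int) × Finset (Int × Int)) (r c : Int) :
    List (List Int) × Finset (Int × Int) :=
  if pvGet st.1 r c == 0 && decide ((r, c) ∉ st.2) then
    let res := pvDfs st.1 H W st.2 [(r, c)] []
    if 0 < res.2.length then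
      let minr := (PySem.List.min? (res.2.map (·.1)) (fun x => x)).getD 0
      let maxr := (PySem.List.max? (res.2.map (·.1)) (fun x => x)).getD 0
      let minc := (PySem.List.min? (res.2.map (·.2)) (fun x => x)).getD 0
      let maxc := (PySem.List.max? (res.2.map (·.2)) (fun x => x)).getD 0
      if (res.2.length : Int) == (maxr - minr + 1) * (maxc - minc + 1) then
        if pvShouldConvert st.1 H W minr maxr minc maxc then
          (res.2.foldl (fun g2 q => pvSet g2 q.1 q.2 4) st.1, res.1)
        else (st.1, res.1)
      else (st.1, res.1)
    else (st.1, res.1)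
  else (st.1, st.2)

def p (grid : List (List Int)) : List (List Int) :=
  let H : Int := grid.length
  let W : Int := (grid.headD []).length
  ((PySem.List.pyRange 0 H 1).foldl (fun st r =>
      (PySem.List.pyRange 0 W 1).foldl (fun st c => pvScanCell H W st r c) st)
    (grid, (∅ : Finset (Int × Int)))).1

-- ===== PORT B =====
-- B's val(r, c): the grid value, None when out of bounds
def pvVal (grid : List (List Int)) (H W r c : Int) : Option Int :=
  if pvInb H W r c then some (pvGet grid r c) else none

-- B's corner_ok: the four diagonal probes against the original grid
def pvCornerOk (grid : List (List Int)) (H W r1 c1 r2 c2 : Int) : Bool :=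
  [(r1, c1, (-1 : Int), (-1 : Int)), (r1, c2, -1, 1), (r2, c1, 1, -1), (r2, c2, 1, 1)].any
    (fun t =>
      pvVal grid H W (t.1 + t.2.2.1) (t.2.1 + t.2.2.2) == some 5 &&
      ([((-1 : Int), (0 : Int)), (1, 0), (0, -1), (0, 1)].foldl
          (fun acc d =>
            if pvVal grid H W (t.1 + t.2.2.1 + d.1) (t.2.1 + t.2.2.2 + d.2) == some 5 then
              acc + 1 else acc) (0 : Int)) == 2)

-- B's `while val(r, c2 + 1) == 0: c2 += 1`
def pvRunRight (grid : List (List Int)) (H W r c2 : Int) : Int :=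
  if h : pvVal grid H W r (c2 + 1) == some 0 then pvRunRight grid H W r (c2 + 1) else c2
termination_by (W - c2).toNat
decreasing_by
  have hin : pvInb H W r (c2 + 1) = true := by
    by_contra hc
    simp [pvVal, hc] at h
  simp only [pvInb, Bool.and_eq_true, decide_eq_true_eq] at hin
  omega

-- B's `while val(r2 + 1, c) == 0: r2 += 1`
def pvRunDown (grid : List (List Int)) (H W c r2 : Int) : Int :=
  if h : pvVal grid H W (r2 + 1) c == some 0 then pvRunDown grid H W c (r2 + 1) else r2
termination_by (H - r2).toNat
decreasing_by
  have hin : pvInb H W (r2 + 1) c = true := by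
    by_contra hc
    simp [pvVal, hc] at h
  simp only [pvInb, Bool.and_eq_true, decide_eq_true_eq] at hin
  omega

-- body of B's double loop at one cell (r, c); state = paint set
def pvCellStep (grid : List (List Int)) (H W : Int) (paint : Finset (Int × Int)) (r c : Int) :
    Finset (Int × Int) :=
  if pvGet grid r c == 0 && !(pvVal grid H W r (c - 1) == some 0) &&
      !(pvVal grid H W (r - 1) c == some 0) then
    let c2 := pvRunRight grid H W r c
    let r2 := pvRunDown grid H W c r
    let filled := (PySem.List.pyRange r (r2 + 1) 1).all (fun i =>
        (PySem.List.pyRange c (c2 + 1) 1).all (fun j => pvGet grid i j == 0))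
    let sealed :=
      ((PySem.List.pyRange c (c2 + 1) 1).all (fun j =>
        !(pvVal grid H W (r - 1) j == some 0) && !(pvVal grid H W (r2 + 1) j == some 0))) &&
      ((PySem.List.pyRange r (r2 + 1) 1).all (fun i =>
        !(pvVal grid H W i (c - 1) == some 0) && !(pvVal grid H W i (c2 + 1) == some 0)))
    if filled && sealed && pvCornerOk grid H W r c r2 c2 then
      (PySem.List.pyRange r (r2 + 1) 1).foldl (fun P i =>
        (PySem.List.pyRange c (c2 + 1) 1).foldl (fun P j => insert (i, j) P) P) paint
    else paint
  else paint

def p_alt (grid : List (List Int)) : List (List Int) :=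
  let H : Int := grid.length
  let W : Int := (grid.headD []).length
  let paint := (PySem.List.pyRange 0 H 1).foldl (fun P r =>
      (PySem.List.pyRange 0 W 1).foldl (fun P c => pvCellStep grid H W P r c) P)
    (∅ : Finset (Int × Int))
  (PySem.List.enumerate grid 0).map (fun rw =>
    (PySem.List.enumerate rw.2 0).map (fun cv => if (rw.1, cv.1) ∈ paint then 4 else cv.2))

-- ===== PRECONDITION & SPEC =====
-- Pre_p excludes the empty grid (len(g[0]) raises IndexError) and grids with a row
-- shorter than the first row (the scan g[r][c] raises IndexError on such a row).
def Pre_p (grid : List (List Int)) : Prop :=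
  grid ≠ [] ∧ ∀ row ∈ grid, (grid.headD []).length ≤ row.length
instance (grid : List (List Int)) : Decidable (Pre_p grid) := by unfold Pre_p; infer_instance

def pvWitness_p : List (List Int) := [[0, 0, 5], [5, 5, 1]]

def Spec_p (grid : List (List Int)) (out : List (List Int)) : Prop := out = p_alt grid
instance (grid : List (List Int)) (out : List (List Int)) : Decidable (Spec_p grid out) := by
  unfold Spec_p; infer_instance

-- ===== CLAIM (what is proved, stated in full; the proofs are below) =====
def Claim_equal_p : Prop := ∀ (grid : List (List Int)), Dom_p grid → Pre_p grid → Spec_p grid (p grid)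

-- ===== LEMMAS AND PROOFS =====

-- proof-layer abbreviations over the ORIGINAL grid
def pvH (grid : List (List Int)) : Int := grid.length
def pvW (grid : List (List Int)) : Int := ((grid.headD []).length : Int)

def ZeroC (grid : List (List Int)) (q : Int × Int) : Prop :=
  pvInb (pvH grid) (pvW grid) q.1 q.2 = true ∧ pvGet grid q.1 q.2 = 0

-- q' is an orthogonal neighbour of q
def Off (q q' : Int × Int) : Prop :=
  (q'.1 = q.1 - 1 ∧ q'.2 = q.2) ∨ (q'.1 = q.1 + 1 ∧ q'.2 = q.2) ∨
  (q'.1 = q.1 ∧ q'.2 = q.2 - 1) ∨ (q'.1 = q.1 ∧ q'.2 = q.2 + 1)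

def Adj (grid : List (List Int)) (q q' : Int × Int) : Prop :=
  ZeroC grid q ∧ ZeroC grid q' ∧ Off q q'

def Conn (grid : List (List Int)) : (Int × Int) → (Int × Int) → Prop :=
  Relation.ReflTransGen (Adj grid)

def InBox (r1 c1 r2 c2 : Int) (q : Int × Int) : Prop :=
  r1 ≤ q.1 ∧ q.1 ≤ r2 ∧ c1 ≤ q.2 ∧ q.2 ≤ c2

def GoodBox (grid : List (List Int)) (r1 c1 r2 c2 : Int) : Prop :=
  r1 ≤ r2 ∧ c1 ≤ c2 ∧ (∀ q, InBox r1 c1 r2 c2 q → ZeroC grid q) ∧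
  (∀ q q', InBox r1 c1 r2 c2 q → Off q q' → ¬ InBox r1 c1 r2 c2 q' → ¬ ZeroC grid q') ∧
  pvCornerOk grid (pvH grid) (pvW grid) r1 c1 r2 c2 = true

def PaintedP (grid : List (List Int)) (q : Int × Int) : Prop :=
  ∃ r1 c1 r2 c2, GoodBox grid r1 c1 r2 c2 ∧ InBox r1 c1 r2 c2 q

-- row-major order: y comes strictly before position (r, c)
def ProcB (r c : Int) (y : Int × Int) : Prop := y.1 < r ∨ (y.1 = r ∧ y.2 < c)

def InvV (grid : List (List Int)) (V : Finset (Int × Int)) (r c : Int) : Prop :=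
  ∀ q, q ∈ V ↔ ∃ y, ZeroC grid y ∧ ProcB r c y ∧ Conn grid y q

def EntN (g : List (List Int)) (i j : Nat) : Int := (g.getD i []).getD j 0

def InvG (grid : List (List Int)) (g : List (List Int)) (V : Finset (Int × Int)) : Prop :=
  g.length = grid.length ∧
  (∀ i : Nat, i < grid.length → (g.getD i []).length = (grid.getD i []).length) ∧
  (∀ i j : Nat, i < grid.length → j < (grid.getD i []).length →
    ((PaintedP grid ((i : Int), (j : Int)) ∧ ((i : Int), (j : Int)) ∈ V →
        EntN g i j = 4) ∧
     (¬ (PaintedP grid ((i : Int), (j : Int)) ∧ ((i : Int), (j : Int)) ∈ V) →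
        EntN g i j = EntN grid i j)))

theorem inb_iff (H W r c : Int) : pvInb H W r c = true ↔ 0 ≤ r ∧ r < H ∧ 0 ≤ c ∧ c < W := by
  simp [pvInb, and_assoc]

theorem adj_symm (grid : List (List Int)) (q q' : Int × Int) (h : Adj grid q q') :
    Adj grid q' q := by
  obtain ⟨h1, h2, h3⟩ := h
  refine ⟨h2, h1, ?_⟩
  unfold Off at h3 ⊢
  rcases h3 with ⟨a, b⟩ | ⟨a, b⟩ | ⟨a, b⟩ | ⟨a, b⟩ <;> omega

theorem conn_symm (grid : List (List Int)) (q q' : Int × Int) (h : Conn grid q q') :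
    Conn grid q' q := by
  induction h with
  | refl => exact Relation.ReflTransGen.refl
  | tail _ hadj ih =>
    exact Relation.ReflTransGen.trans (Relation.ReflTransGen.single (adj_symm _ _ _ hadj)) ih

theorem conn_closed (grid : List (List Int)) (S : Set (Int × Int))
    (hcl : ∀ a b, a ∈ S → Adj grid a b → b ∈ S) (q q' : Int × Int)
    (h : Conn grid q q') (hq : q ∈ S) : q' ∈ S := by
  induction h with
  | refl => exact hq
  | tail _ hadj ih => exact hcl _ _ ih hadj

theorem conn_trans (grid : List (List Int)) (a b c : Int × Int)
    (h1 : Conn grid a b) (h2 : Conn grid b c) : Conn grid a c :=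
  Relation.ReflTransGen.trans h1 h2

-- vertical path inside a column of zeros
theorem conn_vert (grid : List (List Int)) (c a b : Int)
    (hz : ∀ i, a ≤ i → i ≤ b → ZeroC grid (i, c)) (hab : a ≤ b) :
    Conn grid (a, c) (b, c) := by
  obtain ⟨n, hn⟩ : ∃ n : Nat, b = a + n := ⟨(b - a).toNat, by omega⟩
  subst hn
  clear hab
  induction n with
  | zero => simpa using (Relation.ReflTransGen.refl : Conn grid (a, c) (a, c))
  | succ k ih =>
    have h1 : Conn grid (a, c) (a + (k : Int), c) :=
      ih (fun i hi1 hi2 => hz i hi1 (by push_cast at hi2 ⊢; omega))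
    refine Relation.ReflTransGen.tail h1 ⟨?_, ?_, ?_⟩
    · exact hz (a + (k : Int)) (by omega) (by push_cast; omega)
    · exact hz (a + ((k : Nat) + 1 : Nat)) (by push_cast; omega) (by push_cast; omega)
    · dsimp only [Off]
      push_cast
      omega

theorem conn_horiz (grid : List (List Int)) (r a b : Int)
    (hz : ∀ j, a ≤ j → j ≤ b → ZeroC grid (r, j)) (hab : a ≤ b) :
    Conn grid (r, a) (r, b) := by
  obtain ⟨n, hn⟩ : ∃ n : Nat, b = a + n := ⟨(b - a).toNat, by omega⟩
  subst hn
  clear hab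
  induction n with
  | zero => simpa using (Relation.ReflTransGen.refl : Conn grid (r, a) (r, a))
  | succ k ih =>
    have h1 : Conn grid (r, a) (r, a + (k : Int)) :=
      ih (fun j hj1 hj2 => hz j hj1 (by push_cast at hj2 ⊢; omega))
    refine Relation.ReflTransGen.tail h1 ⟨?_, ?_, ?_⟩
    · exact hz (a + (k : Int)) (by omega) (by push_cast; omega)
    · exact hz (a + ((k : Nat) + 1 : Nat)) (by push_cast; omega) (by push_cast; omega)
    · dsimp only [Off]
      push_cast
      omega

-- a filled box is internally connected
theorem box_conn (grid : List (List Int)) (r1 c1 r2 c2 : Int)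
    (hf : ∀ q, InBox r1 c1 r2 c2 q → ZeroC grid q) (q x : Int × Int)
    (hq : InBox r1 c1 r2 c2 q) (hx : InBox r1 c1 r2 c2 x) : Conn grid q x := by
  obtain ⟨qr, qc⟩ := q
  obtain ⟨xr, xc⟩ := x
  obtain ⟨hq1, hq2, hq3, hq4⟩ := hq
  obtain ⟨hx1, hx2, hx3, hx4⟩ := hx
  simp only at hq1 hq2 hq3 hq4 hx1 hx2 hx3 hx4
  have s1 : Conn grid (qr, qc) (r1, qc) :=
    conn_symm _ _ _ (conn_vert grid qc r1 qr
      (fun i h1 h2 => hf (i, qc) ⟨h1, by omega, hq3, hq4⟩) hq1)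
  have s2 : Conn grid (r1, qc) (r1, xc) := by
    rcases le_total qc xc with h | h
    · exact conn_horiz grid r1 qc xc
        (fun j h1 h2 => hf (r1, j) ⟨le_refl _, by omega, by omega, by omega⟩) h
    · exact conn_symm _ _ _ (conn_horiz grid r1 xc qc
        (fun j h1 h2 => hf (r1, j) ⟨le_refl _, by omega, by omega, by omega⟩) h)
  have s3 : Conn grid (r1, xc) (xr, xc) :=
    conn_vert grid xc r1 xr (fun i h1 h2 => hf (i, xc) ⟨h1, by omega, hx3, hx4⟩) hx1
  exact conn_trans _ _ _ _ (conn_trans _ _ _ _ s1 s2) s3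

-- a sealed box is closed under adjacency
theorem goodbox_closed (grid : List (List Int)) (r1 c1 r2 c2 : Int)
    (hgb : GoodBox grid r1 c1 r2 c2) (q q' : Int × Int)
    (hq : InBox r1 c1 r2 c2 q) (hadj : Adj grid q q') : InBox r1 c1 r2 c2 q' := by
  by_contra hout
  exact hgb.2.2.2.1 q q' hq hadj.2.2 hout hadj.2.1

-- the connectivity class of any cell of a good box is exactly the box
theorem goodbox_comp (grid : List (List Int)) (r1 c1 r2 c2 : Int)
    (hgb : GoodBox grid r1 c1 r2 c2) (q : Int × Int) (hq : InBox r1 c1 r2 c2 q) :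
    ∀ x, Conn grid q x ↔ InBox r1 c1 r2 c2 x := by
  intro x
  constructor
  · intro h
    exact conn_closed grid (fun y => InBox r1 c1 r2 c2 y)
      (fun a b ha hab => goodbox_closed grid r1 c1 r2 c2 hgb a b ha hab) q x h hq
  · intro h
    exact box_conn grid r1 c1 r2 c2 hgb.2.2.1 q x hq h

-- ========== pvDfs: unfolding equations and characterization ==========

theorem pvDfs_nil (g : List (List Int)) (H W : Int) (visited : Finset (Int × Int))
    (comp : List (Int × Int)) : pvDfs g H W visited [] comp = (visited, comp) := by
  rw [pvDfs]

theorem pvDfs_visited (g : List (List Int)) (H W : Int) (visited : Finset (Int × Int))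
    (cr cc : Int) (stack comp : List (Int × Int)) (h : (cr, cc) ∈ visited) :
    pvDfs g H W visited ((cr, cc) :: stack) comp = pvDfs g H W visited stack comp := by
  rw [pvDfs]
  simp [h]

theorem pvDfs_new (g : List (List Int)) (H W : Int) (visited : Finset (Int × Int))
    (cr cc : Int) (stack comp : List (Int × Int)) (hv : (cr, cc) ∉ visited)
    (hin : pvInb H W cr cc = true) :
    pvDfs g H W visited ((cr, cc) :: stack) comp =
      pvDfs g H W (insert (cr, cc) visited)
        ((([((-1 : Int), (0 : Int)), (1, 0), (0, -1), (0, 1)].map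
            (fun d => (cr + d.1, cc + d.2))).filter
            (fun q => pvInb H W q.1 q.2 && pvGet g q.1 q.2 == 0 &&
              decide (q ∉ insert (cr, cc) visited))).reverse ++ stack)
        (comp ++ [(cr, cc)]) := by
  rw [pvDfs]
  simp [hv, hin]

theorem mem_pvCells (H W : Int) (q : Int × Int) :
    q ∈ pvCells H W ↔ pvInb H W q.1 q.2 = true := by
  obtain ⟨a, b⟩ := q
  simp only [pvCells, List.mem_toFinset, List.pair_mem_product, PySem.List.mem_pyRange_one,
    pvInb, Bool.and_eq_true, decide_eq_true_eq]
  omega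

theorem off_of_mem_four (cr cc : Int) (d : Int × Int)
    (hd : d ∈ [((-1 : Int), (0 : Int)), (1, 0), (0, -1), (0, 1)]) :
    Off (cr, cc) (cr + d.1, cc + d.2) := by
  fin_cases hd <;> (dsimp only [Off]; omega)

theorem mem_four_of_off (q q' : Int × Int) (h : Off q q') :
    ∃ d ∈ [((-1 : Int), (0 : Int)), (1, 0), (0, -1), (0, 1)],
      q' = (q.1 + d.1, q.2 + d.2) := by
  rcases h with ⟨h1, h2⟩ | ⟨h1, h2⟩ | ⟨h1, h2⟩ | ⟨h1, h2⟩
  · exact ⟨(-1, 0), by simp, by rw [Prod.ext_iff]; constructor <;> simp <;> omega⟩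
  · exact ⟨(1, 0), by simp, by rw [Prod.ext_iff]; constructor <;> simp <;> omega⟩
  · exact ⟨(0, -1), by simp, by rw [Prod.ext_iff]; constructor <;> simp <;> omega⟩
  · exact ⟨(0, 1), by simp, by rw [Prod.ext_iff]; constructor <;> simp <;> omega⟩

theorem dfs_spec (grid g : List (List Int)) (V0 : Finset (Int × Int)) (seed : Int × Int)
    (hg : ∀ r c, pvInb (pvH grid) (pvW grid) r c = true → (r, c) ∉ V0 →
      pvGet g r c = pvGet grid r c)
    (hV0 : ∀ a b, a ∈ V0 → Adj grid a b → b ∈ V0) :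
    ∀ visited stack comp,
      visited = V0 ∪ comp.toFinset →
      (∀ q ∈ stack, ZeroC grid q ∧ q ∉ V0 ∧ Conn grid seed q) →
      (∀ q ∈ comp, ZeroC grid q ∧ q ∉ V0 ∧ Conn grid seed q) →
      comp.Nodup →
      (∀ q ∈ comp, ∀ q', Adj grid q q' → q' ∈ visited ∨ q' ∈ stack) →
      ∃ C, pvDfs g (pvH grid) (pvW grid) visited stack comp = (V0 ∪ C.toFinset, C) ∧
        (∀ q ∈ comp, q ∈ C) ∧ (∀ q ∈ stack, q ∈ V0 ∪ C.toFinset) ∧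
        (∀ q ∈ C, ZeroC grid q ∧ q ∉ V0 ∧ Conn grid seed q) ∧ C.Nodup ∧
        (∀ q ∈ C, ∀ q', Adj grid q q' → q' ∈ V0 ∨ q' ∈ C) := by
  suffices hsuf : ∀ (n : Nat) (visited : Finset (Int × Int))
      (stack comp : List (Int × Int)),
      (pvCells (pvH grid) (pvW grid) \ visited).card = n →
      visited = V0 ∪ comp.toFinset →
      (∀ q ∈ stack, ZeroC grid q ∧ q ∉ V0 ∧ Conn grid seed q) →
      (∀ q ∈ comp, ZeroC grid q ∧ q ∉ V0 ∧ Conn grid seed q) →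
      comp.Nodup →
      (∀ q ∈ comp, ∀ q', Adj grid q q' → q' ∈ visited ∨ q' ∈ stack) →
      ∃ C, pvDfs g (pvH grid) (pvW grid) visited stack comp = (V0 ∪ C.toFinset, C) ∧
        (∀ q ∈ comp, q ∈ C) ∧ (∀ q ∈ stack, q ∈ V0 ∪ C.toFinset) ∧
        (∀ q ∈ C, ZeroC grid q ∧ q ∉ V0 ∧ Conn grid seed q) ∧ C.Nodup ∧
        (∀ q ∈ C, ∀ q', Adj grid q q' → q' ∈ V0 ∨ q' ∈ C) by
    intro visited stack comp
    exact hsuf _ visited stack comp rfl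
  intro n
  induction n using Nat.strong_induction_on with
  | _ n IHn =>
  intro visited stack
  induction stack generalizing visited with
  | nil =>
    intro comp hn h2 h3 h4 h5 h6
    refine ⟨comp, ?_, fun q hq => hq, by simp, h4, h5, ?_⟩
    · rw [pvDfs_nil, h2]
    · intro q hq q' hadj
      rcases h6 q hq q' hadj with hv | hs
      · rw [h2] at hv
        rcases Finset.mem_union.mp hv with h | h
        · exact Or.inl h
        · exact Or.inr (List.mem_toFinset.mp h)
      · simp at hs
  | cons head rest IHs =>
    obtain ⟨cr, cc⟩ := head
    intro comp hn h2 h3 h4 h5 h6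
    by_cases hv : (cr, cc) ∈ visited
    · obtain ⟨C, heq, hsub, hstk, hprop, hnd, hclose⟩ :=
        IHs visited comp hn h2 (fun q hq => h3 q (List.mem_cons_of_mem _ hq)) h4 h5
          (fun q hq q' ha => by
            rcases h6 q hq q' ha with h | h
            · exact Or.inl h
            · rcases List.mem_cons.mp h with he | he
              · exact Or.inl (he ▸ hv)
              · exact Or.inr he)
      refine ⟨C, ?_, hsub, ?_, hprop, hnd, hclose⟩
      · rw [pvDfs_visited _ _ _ _ _ _ _ _ hv, heq]
      · intro q hq
        rcases List.mem_cons.mp hq with he | he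
        · subst he
          rw [h2] at hv
          rcases Finset.mem_union.mp hv with h | h
          · exact Finset.mem_union_left _ h
          · exact Finset.mem_union_right _
              (List.mem_toFinset.mpr (hsub _ (List.mem_toFinset.mp h)))
        · exact hstk q he
    · have hz := h3 (cr, cc) (List.mem_cons_self ..)
      have hin : pvInb (pvH grid) (pvW grid) cr cc = true := hz.1.1
      have hVsub : V0 ⊆ visited := by rw [h2]; exact Finset.subset_union_left
      have hnbr_mem : ∀ q',
          q' ∈ (([((-1 : Int), (0 : Int)), (1, 0), (0, -1), (0, 1)].map
            (fun d => (cr + d.1, cc + d.2))).filter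
            (fun q => pvInb (pvH grid) (pvW grid) q.1 q.2 && pvGet g q.1 q.2 == 0 &&
              decide (q ∉ insert (cr, cc) visited))) →
          ZeroC grid q' ∧ q' ∉ V0 ∧ q' ∉ insert (cr, cc) visited ∧ Off (cr, cc) q' := by
        intro q' hq'
        obtain ⟨hmem, hcond⟩ := List.mem_filter.mp hq'
        obtain ⟨d, hd, hdq⟩ := List.mem_map.mp hmem
        simp only [Bool.and_eq_true, beq_iff_eq, decide_eq_true_eq] at hcond
        have hnv : q' ∉ insert (cr, cc) visited := hcond.2
        have hnV0 : q' ∉ V0 := fun hmem0 =>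
          hnv (Finset.mem_insert_of_mem (hVsub hmem0))
        have hzq : ZeroC grid q' := by
          refine ⟨hcond.1.1, ?_⟩
          rw [← hg q'.1 q'.2 hcond.1.1 hnV0]
          exact hcond.1.2
        exact ⟨hzq, hnV0, hnv, hdq ▸ off_of_mem_four cr cc d hd⟩
      have hlt : (pvCells (pvH grid) (pvW grid) \ insert (cr, cc) visited).card < n := by
        rw [← hn]
        apply Finset.card_lt_card
        constructor
        · exact Finset.sdiff_subset_sdiff (Finset.Subset.refl _) (Finset.subset_insert _ _)
        · intro hsubs
          have h1 : (cr, cc) ∈ pvCells (pvH grid) (pvW grid) \ visited := by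
            rw [Finset.mem_sdiff, mem_pvCells]
            exact ⟨hin, hv⟩
          have h2' := hsubs h1
          simp at h2'
      obtain ⟨C, heq, hsub, hstk, hprop, hnd, hclose⟩ :=
        IHn _ hlt (insert (cr, cc) visited)
          ((([((-1 : Int), (0 : Int)), (1, 0), (0, -1), (0, 1)].map
            (fun d => (cr + d.1, cc + d.2))).filter
            (fun q => pvInb (pvH grid) (pvW grid) q.1 q.2 && pvGet g q.1 q.2 == 0 &&
              decide (q ∉ insert (cr, cc) visited))).reverse ++ rest)
          (comp ++ [(cr, cc)]) rfl
          (by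
            rw [h2]
            ext x
            simp only [Finset.mem_insert, Finset.mem_union, List.mem_toFinset,
              List.toFinset_append, List.mem_append, List.mem_singleton]
            tauto)
          (by
            intro q hq
            rcases List.mem_append.mp hq with h | h
            · have := hnbr_mem q (List.mem_reverse.mp h)
              exact ⟨this.1, this.2.1,
                Relation.ReflTransGen.tail hz.2.2 ⟨hz.1, this.1, this.2.2.2⟩⟩
            · exact h3 q (List.mem_cons_of_mem _ h))
          (by
            intro q hq
            rcases List.mem_append.mp hq with h | h
            · exact h4 q h
            · rw [List.mem_singleton.mp h]
              exact hz)
          (by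
            rw [List.nodup_append]
            refine ⟨h5, List.nodup_singleton _, ?_⟩
            intro a ha b hb
            simp only [List.mem_singleton] at hb
            subst hb
            intro heq
            rw [heq] at ha
            exact hv (by rw [h2]; exact Finset.mem_union_right _ (List.mem_toFinset.mpr ha)))
          (by
            intro q hq q' hadj
            rcases List.mem_append.mp hq with h | h
            · rcases h6 q h q' hadj with hh | hh
              · exact Or.inl (Finset.mem_insert_of_mem hh)
              · rcases List.mem_cons.mp hh with he | he
                · exact Or.inl (he ▸ Finset.mem_insert_self _ _)
                · exact Or.inr (List.mem_append_right _ he)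
            · rw [List.mem_singleton.mp h] at hadj
              by_cases hq' : q' ∈ insert (cr, cc) visited
              · exact Or.inl hq'
              · refine Or.inr (List.mem_append_left _ ?_)
                rw [List.mem_reverse, List.mem_filter]
                obtain ⟨d, hd, hdq⟩ := mem_four_of_off _ _ hadj.2.2
                have hnV0 : q' ∉ V0 := fun hmem0 =>
                  hq' (Finset.mem_insert_of_mem (hVsub hmem0))
                constructor
                · exact List.mem_map.mpr ⟨d, hd, by rw [hdq]⟩
                · simp only [Bool.and_eq_true, beq_iff_eq, decide_eq_true_eq]
                  refine ⟨⟨hadj.2.1.1, ?_⟩, hq'⟩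
                  rw [hg q'.1 q'.2 hadj.2.1.1 hnV0]
                  exact hadj.2.1.2)
      refine ⟨C, ?_, ?_, ?_, hprop, hnd, hclose⟩
      · rw [pvDfs_new _ _ _ _ _ _ _ _ hv hin, heq]
      · intro q hq
        exact hsub q (List.mem_append_left _ hq)
      · intro q hq
        rcases List.mem_cons.mp hq with he | he
        · subst he
          exact Finset.mem_union_right _ (List.mem_toFinset.mpr
            (hsub _ (List.mem_append_right _ (List.mem_singleton.mpr rfl))))
        · exact hstk q (List.mem_append_right _ he)

-- running A's DFS from an unvisited zero seed yields exactly the connectivity class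
theorem dfs_run (grid g : List (List Int)) (V0 : Finset (Int × Int)) (seed : Int × Int)
    (hg : ∀ r c, pvInb (pvH grid) (pvW grid) r c = true → (r, c) ∉ V0 →
      pvGet g r c = pvGet grid r c)
    (hV0 : ∀ a b, a ∈ V0 → Adj grid a b → b ∈ V0)
    (hs : ZeroC grid seed) (hs2 : seed ∉ V0) :
    ∃ C, pvDfs g (pvH grid) (pvW grid) V0 [seed] [] = (V0 ∪ C.toFinset, C) ∧
      C.Nodup ∧ seed ∈ C ∧ (∀ q ∈ C, ZeroC grid q ∧ q ∉ V0) ∧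
      (∀ q, q ∈ C ↔ Conn grid seed q) ∧
      (∀ q ∈ C, ∀ q', Adj grid q q' → q' ∈ V0 ∨ q' ∈ C) := by
  obtain ⟨C, heq, _, hstk, hprop, hnd, hclose⟩ :=
    dfs_spec grid g V0 seed hg hV0 V0 [seed] []
      (by simp)
      (by
        intro q hq
        rw [List.mem_singleton] at hq
        subst hq
        exact ⟨hs, hs2, Relation.ReflTransGen.refl⟩)
      (by simp)
      List.nodup_nil
      (by simp)
  have hseedC : seed ∈ C := by
    have h := hstk seed (List.mem_singleton.mpr rfl)
    rcases Finset.mem_union.mp h with h | h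
    · exact absurd h hs2
    · exact List.mem_toFinset.mp h
  refine ⟨C, heq, hnd, hseedC, fun q hq => ⟨(hprop q hq).1, (hprop q hq).2.1⟩, ?_, hclose⟩
  intro q
  constructor
  · intro hq
    exact (hprop q hq).2.2
  · intro hconn
    refine conn_closed grid {x | x ∈ C} ?_ seed q hconn hseedC
    intro a b ha hab
    rcases hclose a ha b hab with h | h
    · exact absurd (hV0 b a h (adj_symm _ _ _ hab)) (hprop a ha).2.1
    · exact h

-- ========== counting: a component that fills its bounding box is the box ==========

theorem minInt_spec (l : List Int) (hne : l ≠ []) :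
    (∀ y ∈ l, (PySem.List.min? l (fun x => x)).getD 0 ≤ y) ∧
      (PySem.List.min? l (fun x => x)).getD 0 ∈ l := by
  obtain ⟨m, hm⟩ : ∃ m, PySem.List.min? l (fun x => x) = some m := by
    cases l with
    | nil => exact absurd rfl hne
    | cons x t => exact ⟨_, PySem.List.min?_id_cons x t⟩
  rw [hm]
  exact ⟨fun y hy => PySem.List.min?_isMin hm y hy, PySem.List.min?_mem hm⟩

theorem maxInt_spec (l : List Int) (hne : l ≠ []) :
    (∀ y ∈ l, y ≤ (PySem.List.max? l (fun x => x)).getD 0) ∧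
      (PySem.List.max? l (fun x => x)).getD 0 ∈ l := by
  obtain ⟨m, hm⟩ : ∃ m, PySem.List.max? l (fun x => x) = some m := by
    cases l with
    | nil => exact absurd rfl hne
    | cons x t => exact ⟨_, PySem.List.max?_id_cons x t⟩
  rw [hm]
  exact ⟨fun y hy => PySem.List.max?_isMax hm y hy, PySem.List.max?_mem hm⟩

theorem comp_box_of_area (C : List (Int × Int)) (hnd : C.Nodup) (hne : C ≠ [])
    (mr Mr mc Mc : Int)
    (hmr : ∀ q ∈ C, mr ≤ q.1) (hMr : ∀ q ∈ C, q.1 ≤ Mr)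
    (hmc : ∀ q ∈ C, mc ≤ q.2) (hMc : ∀ q ∈ C, q.2 ≤ Mc)
    (harea : (C.length : Int) = (Mr - mr + 1) * (Mc - mc + 1)) :
    ∀ q, q ∈ C ↔ InBox mr mc Mr Mc q := by
  obtain ⟨q0, hq0⟩ := List.exists_mem_of_ne_nil C hne
  have hb1 : mr ≤ Mr := le_trans (hmr q0 hq0) (hMr q0 hq0)
  have hb2 : mc ≤ Mc := le_trans (hmc q0 hq0) (hMc q0 hq0)
  have hsubF : C.toFinset ⊆ Finset.Icc mr Mr ×ˢ Finset.Icc mc Mc := by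
    intro q hq
    rw [List.mem_toFinset] at hq
    rw [Finset.mem_product, Finset.mem_Icc, Finset.mem_Icc]
    exact ⟨⟨hmr q hq, hMr q hq⟩, ⟨hmc q hq, hMc q hq⟩⟩
  have hcard : (Finset.Icc mr Mr ×ˢ Finset.Icc mc Mc).card ≤ C.toFinset.card := by
    rw [Finset.card_product, Int.card_Icc, Int.card_Icc, List.toFinset_card_of_nodup hnd]
    have h1 : ((Mr + 1 - mr).toNat : Int) = Mr + 1 - mr := Int.toNat_of_nonneg (by omega)
    have h2 : ((Mc + 1 - mc).toNat : Int) = Mc + 1 - mc := Int.toNat_of_nonneg (by omega)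
    have : (((Mr + 1 - mr).toNat * (Mc + 1 - mc).toNat : Nat) : Int) = (C.length : Int) := by
      push_cast
      rw [h1, h2, harea]
      ring
    omega
  have heqF : C.toFinset = Finset.Icc mr Mr ×ˢ Finset.Icc mc Mc :=
    Finset.eq_of_subset_of_card_le hsubF hcard
  intro q
  rw [← List.mem_toFinset, heqF, Finset.mem_product, Finset.mem_Icc, Finset.mem_Icc, InBox]
  tauto

theorem box_coords (C : List (Int × Int)) (r1 c1 r2 c2 : Int)
    (hchar : ∀ q, q ∈ C ↔ InBox r1 c1 r2 c2 q) (hb : r1 ≤ r2) (hc : c1 ≤ c2)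
    (mr Mr mc Mc : Int)
    (hmr : ∀ q ∈ C, mr ≤ q.1) (hMr : ∀ q ∈ C, q.1 ≤ Mr)
    (hmc : ∀ q ∈ C, mc ≤ q.2) (hMc : ∀ q ∈ C, q.2 ≤ Mc)
    (hmr' : ∃ q ∈ C, q.1 = mr) (hMr' : ∃ q ∈ C, q.1 = Mr)
    (hmc' : ∃ q ∈ C, q.2 = mc) (hMc' : ∃ q ∈ C, q.2 = Mc) :
    mr = r1 ∧ Mr = r2 ∧ mc = c1 ∧ Mc = c2 := by
  have h1 : (r1, c1) ∈ C := (hchar _).mpr ⟨le_refl _, hb, le_refl _, hc⟩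
  have h2 : (r2, c2) ∈ C := (hchar _).mpr ⟨hb, le_refl _, hc, le_refl _⟩
  obtain ⟨a, ha, ha2⟩ := hmr'
  obtain ⟨b, hbm, hb2⟩ := hMr'
  obtain ⟨e, he, he2⟩ := hmc'
  obtain ⟨f, hfm, hf2⟩ := hMc'
  have := (hchar a).mp ha
  have := (hchar b).mp hbm
  have := (hchar e).mp he
  have := (hchar f).mp hfm
  have := hmr _ h1
  have := hMr _ h2
  have := hmc _ h1
  have := hMc _ h2
  unfold InBox at *
  omega


-- ========== bridging booleans to the proof layer ==========

theorem val0_iff (grid : List (List Int)) (r c : Int) :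
    (pvVal grid (pvH grid) (pvW grid) r c == some 0) = true ↔ ZeroC grid (r, c) := by
  by_cases h : pvInb (pvH grid) (pvW grid) r c = true
  · simp [pvVal, h, ZeroC]
  · simp [pvVal, h, ZeroC]

theorem valne0_iff (grid : List (List Int)) (r c : Int) :
    (!(pvVal grid (pvH grid) (pvW grid) r c == some 0)) = true ↔ ¬ ZeroC grid (r, c) := by
  rw [← val0_iff grid r c]
  cases pvVal grid (pvH grid) (pvW grid) r c == some 0 <;> simp

theorem painted_zero (grid : List (List Int)) (q : Int × Int) (h : PaintedP grid q) :
    ZeroC grid q := by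
  obtain ⟨r1, c1, r2, c2, hgb, hin⟩ := h
  exact hgb.2.2.1 q hin

theorem bool5_eq (grid g : List (List Int))
    (hg5 : ∀ r c, pvInb (pvH grid) (pvW grid) r c = true →
      (pvGet g r c = 5 ↔ pvGet grid r c = 5)) (r c : Int) :
    (pvInb (pvH grid) (pvW grid) r c && pvGet g r c == 5)
      = (pvVal grid (pvH grid) (pvW grid) r c == some 5) := by
  by_cases h : pvInb (pvH grid) (pvW grid) r c = true
  · rw [Bool.eq_iff_iff]
    simp only [pvVal, h, if_pos, Bool.and_eq_true, beq_iff_eq, true_and,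
      Option.some.injEq]
    exact hg5 r c h
  · have h' : pvInb (pvH grid) (pvW grid) r c = false := by
      cases hb : pvInb (pvH grid) (pvW grid) r c
      · rfl
      · exact absurd hb h
    simp [pvVal, h']

theorem should_eq (grid g : List (List Int))
    (hg5 : ∀ r c, pvInb (pvH grid) (pvW grid) r c = true →
      (pvGet g r c = 5 ↔ pvGet grid r c = 5)) (r1 c1 r2 c2 : Int) :
    pvShouldConvert g (pvH grid) (pvW grid) r1 r2 c1 c2 =
      pvCornerOk grid (pvH grid) (pvW grid) r1 c1 r2 c2 := by
  have hb := bool5_eq grid g hg5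
  simp only [pvShouldConvert, pvCornerOk, pvAdj5, List.any_cons, List.any_nil,
    List.foldl_cons, List.foldl_nil, hb]

-- ========== pointwise description of A's painting fold ==========

theorem pvGet_eq_EntN (g : List (List Int)) (r c : Int) :
    pvGet g r c = EntN g r.toNat c.toNat := rfl

theorem getD_eq_getElem?_pv {α : Type} (l : List α) (i : Nat) (d : α) :
    l.getD i d = l[i]?.getD d := List.getD_eq_getElem?_getD

theorem pvSet_length (g : List (List Int)) (r c v : Int) :
    (pvSet g r c v).length = g.length := by
  simp [pvSet]

theorem pvSet_row (g : List (List Int)) (r c v : Int) (i : Nat) :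
    (pvSet g r c v).getD i [] =
      if i = r.toNat ∧ i < g.length then (g.getD i []).set c.toNat v
      else g.getD i [] := by
  unfold pvSet
  rw [getD_eq_getElem?_pv, List.getElem?_set]
  by_cases h1 : r.toNat = i
  · subst h1
    by_cases h2 : r.toNat < g.length
    · rw [if_pos rfl, if_pos h2, Option.getD_some, if_pos ⟨rfl, h2⟩]
    · rw [if_pos rfl, if_neg h2, if_neg (fun hh => h2 hh.2)]
      rw [getD_eq_getElem?_pv, List.getElem?_eq_none (by omega)]
  · rw [if_neg h1, if_neg (fun hh => h1 hh.1.symm)]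
    rw [getD_eq_getElem?_pv]

theorem pvSet_rowlen (g : List (List Int)) (r c v : Int) (i : Nat) :
    ((pvSet g r c v).getD i []).length = (g.getD i []).length := by
  rw [pvSet_row]
  split_ifs with h
  · rw [List.length_set]
  · rfl

theorem EntN_pvSet (g : List (List Int)) (r c v : Int) (i j : Nat) :
    EntN (pvSet g r c v) i j =
      if i = r.toNat ∧ j = c.toNat ∧ i < g.length ∧ j < (g.getD i []).length then v
      else EntN g i j := by
  unfold EntN
  rw [pvSet_row]
  by_cases h1 : i = r.toNat ∧ i < g.length
  · rw [if_pos h1]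
    rw [getD_eq_getElem?_pv ((g.getD i []).set c.toNat v), List.getElem?_set]
    by_cases h2 : c.toNat = j
    · subst h2
      by_cases h3 : c.toNat < (g.getD i []).length
      · rw [if_pos rfl, if_pos h3, Option.getD_some, if_pos ⟨h1.1, rfl, h1.2, h3⟩]
      · rw [if_pos rfl, if_neg h3, if_neg (fun hh => h3 hh.2.2.2)]
        rw [getD_eq_getElem?_pv (g.getD i []), List.getElem?_eq_none (by omega)]
    · rw [if_neg h2, if_neg (fun hh => h2 hh.2.1.symm)]
      rw [getD_eq_getElem?_pv (g.getD i [])]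
  · rw [if_neg h1, if_neg (fun hh => h1 ⟨hh.1, hh.2.2.1⟩)]

theorem paint_fold_length (C : List (Int × Int)) (g : List (List Int)) :
    (C.foldl (fun g2 q => pvSet g2 q.1 q.2 4) g).length = g.length := by
  induction C generalizing g with
  | nil => rfl
  | cons q C ih => rw [List.foldl_cons, ih, pvSet_length]

theorem paint_fold_rowlen (C : List (Int × Int)) (g : List (List Int)) (i : Nat) :
    ((C.foldl (fun g2 q => pvSet g2 q.1 q.2 4) g).getD i []).length =
      (g.getD i []).length := by
  induction C generalizing g with
  | nil => rfl
  | cons q C ih => rw [List.foldl_cons, ih, pvSet_rowlen]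

theorem paint_fold_entry (C : List (Int × Int)) (g : List (List Int))
    (hC : ∀ q ∈ C, 0 ≤ q.1 ∧ 0 ≤ q.2 ∧ q.1.toNat < g.length ∧
      q.2.toNat < (g.getD q.1.toNat []).length) (i j : Nat) :
    EntN (C.foldl (fun g2 q => pvSet g2 q.1 q.2 4) g) i j =
      if ((i : Int), (j : Int)) ∈ C then 4 else EntN g i j := by
  induction C generalizing g with
  | nil => simp
  | cons q C ih =>
    obtain ⟨a, b⟩ := q
    rw [List.foldl_cons]
    rw [ih _ (by
      intro q' hq'
      have hh := hC q' (List.mem_cons_of_mem _ hq')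
      refine ⟨hh.1, hh.2.1, ?_, ?_⟩
      · rw [pvSet_length]; exact hh.2.2.1
      · rw [pvSet_rowlen]; exact hh.2.2.2)]
    rw [EntN_pvSet]
    have hq := hC (a, b) (List.mem_cons_self ..)
    simp only at hq
    by_cases hC' : ((i : Int), (j : Int)) ∈ C
    · rw [if_pos hC', if_pos (List.mem_cons.mpr (Or.inr hC'))]
    · rw [if_neg hC']
      by_cases he : ((i : Int), (j : Int)) = (a, b)
      · rw [Prod.mk.injEq] at he
        have hai : a.toNat = i := by omega
        have hbj : b.toNat = j := by omega
        rw [if_pos ⟨hai.symm, hbj.symm, by omega,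
          by rw [← hai, ← hbj]; exact hq.2.2.2⟩]
        rw [if_pos (List.mem_cons.mpr (Or.inl (by rw [Prod.mk.injEq]; exact he)))]
      · rw [Prod.mk.injEq] at he
        rw [if_neg (by
          intro hh
          exact he ⟨by omega, by omega⟩)]
        rw [if_neg (by
          rw [List.mem_cons]
          rintro (h | h)
          · rw [Prod.mk.injEq] at h
            exact he h
          · exact hC' h)]

-- ========== membership description of B's painting fold ==========

theorem mem_foldl_insert_col (i0 : Int) (l : List Int) (P0 : Finset (Int × Int))
    (q : Int × Int) :
    q ∈ l.foldl (fun P j => insert (i0, j) P) P0 ↔ q ∈ P0 ∨ (q.1 = i0 ∧ q.2 ∈ l) := by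
  induction l generalizing P0 with
  | nil => simp
  | cons x t ih =>
    rw [List.foldl_cons, ih]
    simp only [Finset.mem_insert, Prod.ext_iff, List.mem_cons]
    tauto

theorem mem_foldl_insert_box (l1 l2 : List Int) (P0 : Finset (Int × Int)) (q : Int × Int) :
    q ∈ l1.foldl (fun P i => l2.foldl (fun P j => insert (i, j) P) P) P0 ↔
      q ∈ P0 ∨ (q.1 ∈ l1 ∧ q.2 ∈ l2) := by
  induction l1 generalizing P0 with
  | nil => simp
  | cons x t ih =>
    rw [List.foldl_cons, ih, mem_foldl_insert_col]
    simp only [List.mem_cons]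
    tauto

-- ========== the while-loops of B ==========

theorem runRight_bounds (grid : List (List Int)) (r c : Int) (hc : c < pvW grid) :
    c ≤ pvRunRight grid (pvH grid) (pvW grid) r c ∧
      pvRunRight grid (pvH grid) (pvW grid) r c < pvW grid := by
  suffices hsuf : ∀ (n : Nat) (c : Int), (pvW grid - c).toNat = n → c < pvW grid →
      c ≤ pvRunRight grid (pvH grid) (pvW grid) r c ∧
        pvRunRight grid (pvH grid) (pvW grid) r c < pvW grid by
    exact hsuf _ c rfl hc
  intro n
  induction n using Nat.strong_induction_on with
  | _ n IHn =>
  intro c hn hc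
  rw [pvRunRight]
  split_ifs with h
  · have hin : pvInb (pvH grid) (pvW grid) r (c + 1) = true := by
      by_contra hcon
      simp [pvVal, hcon] at h
    rw [inb_iff] at hin
    have := IHn ((pvW grid - (c + 1)).toNat) (by omega) (c + 1) rfl (by omega)
    exact ⟨by omega, this.2⟩
  · exact ⟨le_refl _, hc⟩

theorem runDown_bounds (grid : List (List Int)) (c r : Int) (hr : r < pvH grid) :
    r ≤ pvRunDown grid (pvH grid) (pvW grid) c r ∧
      pvRunDown grid (pvH grid) (pvW grid) c r < pvH grid := by
  suffices hsuf : ∀ (n : Nat) (r : Int), (pvH grid - r).toNat = n → r < pvH grid →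
      r ≤ pvRunDown grid (pvH grid) (pvW grid) c r ∧
        pvRunDown grid (pvH grid) (pvW grid) c r < pvH grid by
    exact hsuf _ r rfl hr
  intro n
  induction n using Nat.strong_induction_on with
  | _ n IHn =>
  intro r hn hr
  rw [pvRunDown]
  split_ifs with h
  · have hin : pvInb (pvH grid) (pvW grid) (r + 1) c = true := by
      by_contra hcon
      simp [pvVal, hcon] at h
    rw [inb_iff] at hin
    have := IHn ((pvH grid - (r + 1)).toNat) (by omega) (r + 1) rfl (by omega)
    exact ⟨by omega, this.2⟩
  · exact ⟨le_refl _, hr⟩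

theorem runRight_stop (grid : List (List Int)) (r c c2 : Int) (hcc2 : c ≤ c2)
    (hz : ∀ j, c < j → j ≤ c2 → ZeroC grid (r, j))
    (hstop : ¬ ZeroC grid (r, c2 + 1)) :
    pvRunRight grid (pvH grid) (pvW grid) r c = c2 := by
  obtain ⟨n, hn⟩ : ∃ n : Nat, c2 = c + n := ⟨(c2 - c).toNat, by omega⟩
  subst hn
  clear hcc2
  induction n generalizing c with
  | zero =>
    rw [pvRunRight, dif_neg]
    · simp
    · intro hcond
      apply hstop
      have := (val0_iff grid r (c + 1)).mp hcond
      simpa using this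
  | succ k ih =>
    rw [pvRunRight, dif_pos]
    · have h1 := ih (c := c + 1)
        (fun j hj1 hj2 => hz j (by omega) (by push_cast at hj2 ⊢; omega))
        (by
          intro hcon
          apply hstop
          have : (c + 1 + (k : Int)) + 1 = c + ((k : Nat) + 1 : Nat) + 1 := by
            push_cast; ring
          rwa [this] at hcon)
      rw [h1]
      push_cast
      ring
    · apply (val0_iff grid r (c + 1)).mpr
      exact hz (c + 1) (by omega) (by push_cast; omega)

theorem runDown_stop (grid : List (List Int)) (c r r2 : Int) (hrr2 : r ≤ r2)
    (hz : ∀ i, r < i → i ≤ r2 → ZeroC grid (i, c))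
    (hstop : ¬ ZeroC grid (r2 + 1, c)) :
    pvRunDown grid (pvH grid) (pvW grid) c r = r2 := by
  obtain ⟨n, hn⟩ : ∃ n : Nat, r2 = r + n := ⟨(r2 - r).toNat, by omega⟩
  subst hn
  clear hrr2
  induction n generalizing r with
  | zero =>
    rw [pvRunDown, dif_neg]
    · simp
    · intro hcond
      apply hstop
      have := (val0_iff grid (r + 1) c).mp hcond
      simpa using this
  | succ k ih =>
    rw [pvRunDown, dif_pos]
    · have h1 := ih (r := r + 1)
        (fun i hi1 hi2 => hz i (by omega) (by push_cast at hi2 ⊢; omega))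
        (by
          intro hcon
          apply hstop
          have : (r + 1 + (k : Int)) + 1 = r + ((k : Nat) + 1 : Nat) + 1 := by
            push_cast; ring
          rwa [this] at hcon)
      rw [h1]
      push_cast
      ring
    · apply (val0_iff grid (r + 1) c).mpr
      exact hz (r + 1) (by omega) (by push_cast; omega)

-- ========== what one B-scan step adds ==========

def CellAdds (grid : List (List Int)) (r c : Int) (q : Int × Int) : Prop :=
  ZeroC grid (r, c) ∧ ¬ ZeroC grid (r, c - 1) ∧ ¬ ZeroC grid (r - 1, c) ∧
  GoodBox grid r c (pvRunDown grid (pvH grid) (pvW grid) c r)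
    (pvRunRight grid (pvH grid) (pvW grid) r c) ∧
  InBox r c (pvRunDown grid (pvH grid) (pvW grid) c r)
    (pvRunRight grid (pvH grid) (pvW grid) r c) q

theorem mem_cellStep (grid : List (List Int)) (P : Finset (Int × Int)) (r c : Int)
    (hr1 : 0 ≤ r) (hr2 : r < pvH grid) (hc1 : 0 ≤ c) (hc2 : c < pvW grid) (q : Int × Int) :
    q ∈ pvCellStep grid (pvH grid) (pvW grid) P r c ↔ q ∈ P ∨ CellAdds grid r c q := by
  have hinb : pvInb (pvH grid) (pvW grid) r c = true := by
    rw [inb_iff]; exact ⟨hr1, hr2, hc1, hc2⟩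
  have hrd := runDown_bounds grid c r hr2
  have hrr := runRight_bounds grid r c hc2
  unfold pvCellStep
  by_cases hz0 : ZeroC grid (r, c)
  case neg =>
    have e1 : (pvGet grid r c == 0) = false := by
      simp only [beq_eq_false_iff_ne, ne_eq]
      intro hh
      exact hz0 ⟨hinb, hh⟩
    rw [e1]
    simp only [Bool.false_and, if_false]
    constructor
    · exact Or.inl
    · rintro (h | h)
      · exact h
      · exact absurd h.1 hz0
  case pos =>
  have e1 : (pvGet grid r c == 0) = true := by
    simp only [beq_iff_eq]
    exact hz0.2
  by_cases hz1 : ZeroC grid (r, c - 1)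
  case pos =>
    have e2 : (!(pvVal grid (pvH grid) (pvW grid) r (c - 1) == some 0)) = false := by
      cases hb : (!(pvVal grid (pvH grid) (pvW grid) r (c - 1) == some 0))
      · rfl
      · exact absurd hz1 ((valne0_iff grid r (c - 1)).mp hb)
    rw [e1, e2]
    simp only [Bool.and_false, Bool.false_and, if_false]
    constructor
    · exact Or.inl
    · rintro (h | h)
      · exact h
      · exact absurd hz1 h.2.1
  case neg =>
  have e2 : (!(pvVal grid (pvH grid) (pvW grid) r (c - 1) == some 0)) = true :=
    (valne0_iff grid r (c - 1)).mpr hz1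
  by_cases hz2 : ZeroC grid (r - 1, c)
  case pos =>
    have e3 : (!(pvVal grid (pvH grid) (pvW grid) (r - 1) c == some 0)) = false := by
      cases hb : (!(pvVal grid (pvH grid) (pvW grid) (r - 1) c == some 0))
      · rfl
      · exact absurd hz2 ((valne0_iff grid (r - 1) c).mp hb)
    rw [e1, e2, e3]
    simp only [Bool.and_false, Bool.and_true, if_false]
    constructor
    · exact Or.inl
    · rintro (h | h)
      · exact h
      · exact absurd hz2 h.2.2.1
  case neg =>
  have e3 : (!(pvVal grid (pvH grid) (pvW grid) (r - 1) c == some 0)) = true :=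
    (valne0_iff grid (r - 1) c).mpr hz2
  rw [e1, e2, e3]
  simp only [Bool.and_true, Bool.and_self, if_true]
  set r2 := pvRunDown grid (pvH grid) (pvW grid) c r with hr2d
  set c2 := pvRunRight grid (pvH grid) (pvW grid) r c with hc2d
  have hfill : ((PySem.List.pyRange r (r2 + 1) 1).all (fun i =>
      (PySem.List.pyRange c (c2 + 1) 1).all (fun j => pvGet grid i j == 0))) = true ↔
      (∀ x, InBox r c r2 c2 x → ZeroC grid x) := by
    rw [List.all_eq_true]
    constructor
    · intro hall x hx
      obtain ⟨a, b⟩ := x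
      obtain ⟨hx1, hx2, hx3, hx4⟩ := hx
      simp only at hx1 hx2 hx3 hx4
      have h1 := hall a (PySem.List.mem_pyRange_one.mpr ⟨hx1, by omega⟩)
      rw [List.all_eq_true] at h1
      have h2 := h1 b (PySem.List.mem_pyRange_one.mpr ⟨hx3, by omega⟩)
      simp only [beq_iff_eq] at h2
      refine ⟨?_, h2⟩
      rw [inb_iff]
      constructor
      · omega
      constructor
      · omega
      constructor
      · omega
      · omega
    · intro hbox i hi
      rw [List.all_eq_true]
      intro j hj
      rw [PySem.List.mem_pyRange_one] at hi hj
      simp only [beq_iff_eq]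
      exact (hbox (i, j) ⟨hi.1, by omega, hj.1, by omega⟩).2
  have hseal : (((PySem.List.pyRange c (c2 + 1) 1).all (fun j =>
        !(pvVal grid (pvH grid) (pvW grid) (r - 1) j == some 0) &&
        !(pvVal grid (pvH grid) (pvW grid) (r2 + 1) j == some 0))) = true ∧
      ((PySem.List.pyRange r (r2 + 1) 1).all (fun i =>
        !(pvVal grid (pvH grid) (pvW grid) i (c - 1) == some 0) &&
        !(pvVal grid (pvH grid) (pvW grid) i (c2 + 1) == some 0))) = true) ↔
      (∀ x x', InBox r c r2 c2 x → Off x x' → ¬ InBox r c r2 c2 x' → ¬ ZeroC grid x') := by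
    rw [List.all_eq_true, List.all_eq_true]
    constructor
    · intro ⟨hh, hvv⟩ x x' hx hoff hout
      obtain ⟨a, b⟩ := x
      obtain ⟨hx1, hx2, hx3, hx4⟩ := hx
      simp only at hx1 hx2 hx3 hx4
      rcases hoff with ⟨ho1, ho2⟩ | ⟨ho1, ho2⟩ | ⟨ho1, ho2⟩ | ⟨ho1, ho2⟩ <;>
        simp only at ho1 ho2
      · -- x' = (a - 1, b): outside means a - 1 < r, so a = r
        have ha : a = r := by
          dsimp only [InBox] at hout
          omega
        have hj := hh b (PySem.List.mem_pyRange_one.mpr ⟨hx3, by omega⟩)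
        rw [Bool.and_eq_true] at hj
        have := (valne0_iff grid (r - 1) b).mp hj.1
        have hx' : x' = (r - 1, b) := by
          rw [Prod.ext_iff]
          constructor
          · omega
          · omega
        rwa [hx']
      · have ha : a = r2 := by
          dsimp only [InBox] at hout
          omega
        have hj := hh b (PySem.List.mem_pyRange_one.mpr ⟨hx3, by omega⟩)
        rw [Bool.and_eq_true] at hj
        have := (valne0_iff grid (r2 + 1) b).mp hj.2
        have hx' : x' = (r2 + 1, b) := by
          rw [Prod.ext_iff]
          constructor
          · omega
          · omega
        rwa [hx']
      · have hb : b = c := by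
          dsimp only [InBox] at hout
          omega
        have hj := hvv a (PySem.List.mem_pyRange_one.mpr ⟨hx1, by omega⟩)
        rw [Bool.and_eq_true] at hj
        have := (valne0_iff grid a (c - 1)).mp hj.1
        have hx' : x' = (a, c - 1) := by
          rw [Prod.ext_iff]
          constructor
          · omega
          · omega
        rwa [hx']
      · have hb : b = c2 := by
          dsimp only [InBox] at hout
          omega
        have hj := hvv a (PySem.List.mem_pyRange_one.mpr ⟨hx1, by omega⟩)
        rw [Bool.and_eq_true] at hj
        have := (valne0_iff grid a (c2 + 1)).mp hj.2
        have hx' : x' = (a, c2 + 1) := by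
          rw [Prod.ext_iff]
          constructor
          · omega
          · omega
        rwa [hx']
    · intro hsealed
      constructor
      · intro j hj
        rw [PySem.List.mem_pyRange_one] at hj
        rw [Bool.and_eq_true]
        constructor
        · exact (valne0_iff grid (r - 1) j).mpr
            (hsealed (r, j) (r - 1, j) ⟨le_refl _, by omega, hj.1, by omega⟩
              (Or.inl ⟨rfl, rfl⟩) (by dsimp only [InBox]; omega))
        · exact (valne0_iff grid (r2 + 1) j).mpr
            (hsealed (r2, j) (r2 + 1, j) ⟨by omega, le_refl _, hj.1, by omega⟩
              (Or.inr (Or.inl ⟨rfl, rfl⟩)) (by dsimp only [InBox]; omega))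
      · intro i hi
        rw [PySem.List.mem_pyRange_one] at hi
        rw [Bool.and_eq_true]
        constructor
        · exact (valne0_iff grid i (c - 1)).mpr
            (hsealed (i, c) (i, c - 1) ⟨hi.1, by omega, le_refl _, by omega⟩
              (Or.inr (Or.inr (Or.inl ⟨rfl, rfl⟩))) (by dsimp only [InBox]; omega))
        · exact (valne0_iff grid i (c2 + 1)).mpr
            (hsealed (i, c2) (i, c2 + 1) ⟨hi.1, by omega, by omega, le_refl _⟩
              (Or.inr (Or.inr (Or.inr ⟨rfl, rfl⟩))) (by dsimp only [InBox]; omega))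
  split_ifs with hchk
  · -- checks passed: we add exactly the box
    rw [mem_foldl_insert_box]
    simp only [Bool.and_eq_true] at hchk
    have hgb : GoodBox grid r c r2 c2 :=
      ⟨by omega, by omega, hfill.mp hchk.1.1, hseal.mp hchk.1.2, hchk.2⟩
    constructor
    · rintro (h | h)
      · exact Or.inl h
      · exact Or.inr ⟨hz0, hz1, hz2, hgb,
          PySem.List.mem_pyRange_one.mp h.1 |>.1,
          by have := PySem.List.mem_pyRange_one.mp h.1; omega,
          PySem.List.mem_pyRange_one.mp h.2 |>.1,
          by have := PySem.List.mem_pyRange_one.mp h.2; omega⟩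
    · rintro (h | h)
      · exact Or.inl h
      · obtain ⟨_, _, _, _, hib⟩ := h
        exact Or.inr ⟨PySem.List.mem_pyRange_one.mpr ⟨hib.1, by
            have := hib.2.1; omega⟩,
          PySem.List.mem_pyRange_one.mpr ⟨hib.2.2.1, by have := hib.2.2.2; omega⟩⟩
  · constructor
    · exact Or.inl
    · rintro (h | h)
      · exact h
      · obtain ⟨_, _, _, hgb, _⟩ := h
        exfalso
        apply hchk
        rw [Bool.and_eq_true, Bool.and_eq_true]
        obtain ⟨s1, s2⟩ := hseal.mpr hgb.2.2.2.1
        exact ⟨⟨hfill.mpr hgb.2.2.1, by rw [s1, s2]; rfl⟩, hgb.2.2.2.2⟩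


-- ========== B paint set: full characterization ==========

theorem goodbox_runs (grid : List (List Int)) (r1 c1 r2 c2 : Int)
    (hgb : GoodBox grid r1 c1 r2 c2) :
    pvRunRight grid (pvH grid) (pvW grid) r1 c1 = c2 ∧
    pvRunDown grid (pvH grid) (pvW grid) c1 r1 = r2 := by
  constructor
  · apply runRight_stop grid r1 c1 c2 hgb.2.1
    · intro j hj1 hj2
      exact hgb.2.2.1 (r1, j) ⟨le_refl _, hgb.1, by omega, hj2⟩
    · exact hgb.2.2.2.1 (r1, c2) (r1, c2 + 1) ⟨le_refl _, hgb.1, hgb.2.1, le_refl _⟩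
        (Or.inr (Or.inr (Or.inr ⟨rfl, rfl⟩))) (by dsimp only [InBox]; omega)
  · apply runDown_stop grid c1 r1 r2 hgb.1
    · intro i hi1 hi2
      exact hgb.2.2.1 (i, c1) ⟨by omega, hi2, le_refl _, hgb.2.1⟩
    · exact hgb.2.2.2.1 (r2, c1) (r2 + 1, c1) ⟨hgb.1, le_refl _, le_refl _, hgb.2.1⟩
        (Or.inr (Or.inl ⟨rfl, rfl⟩)) (by dsimp only [InBox]; omega)

theorem goodbox_cellAdds (grid : List (List Int)) (r1 c1 r2 c2 : Int)
    (hgb : GoodBox grid r1 c1 r2 c2) (q : Int × Int) :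
    CellAdds grid r1 c1 q ↔ InBox r1 c1 r2 c2 q := by
  obtain ⟨hrr, hrd⟩ := goodbox_runs grid r1 c1 r2 c2 hgb
  unfold CellAdds
  rw [hrr, hrd]
  constructor
  · intro h
    exact h.2.2.2.2
  · intro h
    refine ⟨hgb.2.2.1 (r1, c1) ⟨le_refl _, hgb.1, le_refl _, hgb.2.1⟩, ?_, ?_, hgb, h⟩
    · exact hgb.2.2.2.1 (r1, c1) (r1, c1 - 1) ⟨le_refl _, hgb.1, le_refl _, hgb.2.1⟩
        (Or.inr (Or.inr (Or.inl ⟨rfl, rfl⟩))) (by dsimp only [InBox]; omega)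
    · exact hgb.2.2.2.1 (r1, c1) (r1 - 1, c1) ⟨le_refl _, hgb.1, le_refl _, hgb.2.1⟩
        (Or.inl ⟨rfl, rfl⟩) (by dsimp only [InBox]; omega)

theorem mem_foldl_cell_row (grid : List (List Int)) (r : Int) (hr1 : 0 ≤ r)
    (hr2 : r < pvH grid) (l : List Int) (hl : ∀ c ∈ l, 0 ≤ c ∧ c < pvW grid)
    (P : Finset (Int × Int)) (q : Int × Int) :
    q ∈ l.foldl (fun P c => pvCellStep grid (pvH grid) (pvW grid) P r c) P ↔
      q ∈ P ∨ ∃ c ∈ l, CellAdds grid r c q := by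
  induction l generalizing P with
  | nil => simp
  | cons x t ih =>
    rw [List.foldl_cons, ih (fun c hc => hl c (List.mem_cons_of_mem _ hc))]
    rw [mem_cellStep grid P r x hr1 hr2 (hl x (List.mem_cons_self ..)).1
      (hl x (List.mem_cons_self ..)).2]
    simp only [List.mem_cons]
    constructor
    · rintro ((h | h) | ⟨cx, hcx, h⟩)
      · exact Or.inl h
      · exact Or.inr ⟨x, Or.inl rfl, h⟩
      · exact Or.inr ⟨cx, Or.inr hcx, h⟩
    · rintro (h | ⟨cx, (hcx | hcx), h⟩)
      · exact Or.inl (Or.inl h)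
      · exact Or.inl (Or.inr (hcx ▸ h))
      · exact Or.inr ⟨cx, hcx, h⟩

theorem mem_foldl_cell_all (grid : List (List Int)) (l : List Int)
    (hl : ∀ r ∈ l, 0 ≤ r ∧ r < pvH grid) (P : Finset (Int × Int)) (q : Int × Int) :
    q ∈ l.foldl (fun P r => (PySem.List.pyRange 0 (pvW grid) 1).foldl
        (fun P c => pvCellStep grid (pvH grid) (pvW grid) P r c) P) P ↔
      q ∈ P ∨ ∃ r ∈ l, ∃ c, (0 ≤ c ∧ c < pvW grid) ∧ CellAdds grid r c q := by
  induction l generalizing P with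
  | nil => simp
  | cons x t ih =>
    rw [List.foldl_cons, ih (fun r hr => hl r (List.mem_cons_of_mem _ hr))]
    rw [mem_foldl_cell_row grid x (hl x (List.mem_cons_self ..)).1
      (hl x (List.mem_cons_self ..)).2 _
      (fun c hc => PySem.List.mem_pyRange_one.mp hc) P q]
    simp only [List.mem_cons]
    constructor
    · rintro ((h | ⟨cx, hcx, h⟩) | ⟨rx, hrx, cx, hcx, h⟩)
      · exact Or.inl h
      · exact Or.inr ⟨x, Or.inl rfl, cx, PySem.List.mem_pyRange_one.mp hcx, h⟩
      · exact Or.inr ⟨rx, Or.inr hrx, cx, hcx, h⟩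
    · rintro (h | ⟨rx, (hrx | hrx), cx, hcx, h⟩)
      · exact Or.inl (Or.inl h)
      · exact Or.inl (Or.inr ⟨cx, PySem.List.mem_pyRange_one.mpr hcx, hrx ▸ h⟩)
      · exact Or.inr ⟨rx, hrx, cx, hcx, h⟩

theorem mem_paint (grid : List (List Int)) (q : Int × Int) :
    q ∈ ((PySem.List.pyRange 0 (pvH grid) 1).foldl (fun P r =>
        (PySem.List.pyRange 0 (pvW grid) 1).foldl
          (fun P c => pvCellStep grid (pvH grid) (pvW grid) P r c) P)
      (∅ : Finset (Int × Int))) ↔ PaintedP grid q := by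
  rw [mem_foldl_cell_all grid _ (fun r hr => PySem.List.mem_pyRange_one.mp hr) ∅ q]
  constructor
  · rintro (h | ⟨r, hrm, c, hcb, hadds⟩)
    · simp at h
    · exact ⟨r, c, _, _, hadds.2.2.2.1, hadds.2.2.2.2⟩
  · intro hp
    obtain ⟨r1, c1, r2, c2, hgb, hin⟩ := hp
    have hz := hgb.2.2.1 (r1, c1) ⟨le_refl _, hgb.1, le_refl _, hgb.2.1⟩
    have hinb := hz.1
    rw [inb_iff] at hinb
    refine Or.inr ⟨r1, PySem.List.mem_pyRange_one.mpr ⟨hinb.1, hinb.2.1⟩, c1,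
      ⟨hinb.2.2.1, hinb.2.2.2⟩, ?_⟩
    exact (goodbox_cellAdds grid r1 c1 r2 c2 hgb q).mpr hin

-- ========== invariant helpers ==========

theorem invV_closed (grid : List (List Int)) (V : Finset (Int × Int)) (r c : Int)
    (hV : InvV grid V r c) : ∀ a b, a ∈ V → Adj grid a b → b ∈ V := by
  intro a b ha hab
  obtain ⟨y, hy1, hy2, hy3⟩ := (hV a).mp ha
  exact (hV b).mpr ⟨y, hy1, hy2, Relation.ReflTransGen.tail hy3 hab⟩

theorem invV_connClosed (grid : List (List Int)) (V : Finset (Int × Int)) (r c : Int)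
    (hV : InvV grid V r c) (a b : Int × Int) (ha : a ∈ V) (hc : Conn grid a b) : b ∈ V :=
  conn_closed grid {x | x ∈ V} (fun x y hx hxy => invV_closed grid V r c hV x y hx hxy)
    a b hc ha

def RowsOk (grid : List (List Int)) : Prop :=
  ∀ i : Nat, i < grid.length → (grid.headD []).length ≤ (grid.getD i []).length

theorem rowsok_of_pre (grid : List (List Int)) (hp : Pre_p grid) : RowsOk grid := by
  intro i hi
  apply hp.2
  rw [getD_eq_getElem?_pv, List.getElem?_eq_getElem hi, Option.getD_some]
  exact List.getElem_mem hi

theorem inb_dims (grid : List (List Int)) (r c : Int)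
    (h : pvInb (pvH grid) (pvW grid) r c = true) (hR : RowsOk grid) :
    r.toNat < grid.length ∧ c.toNat < (grid.getD r.toNat []).length := by
  rw [inb_iff] at h
  have e1 : (grid.length : Int) = pvH grid := rfl
  have h1 : r.toNat < grid.length := by omega
  refine ⟨h1, ?_⟩
  have h2 := hR r.toNat h1
  have e2 : pvW grid = ((grid.headD []).length : Int) := rfl
  omega

theorem invG_entry_frozen (grid g : List (List Int)) (V : Finset (Int × Int))
    (hG : InvG grid g V) (hR : RowsOk grid) :
    ∀ r c, pvInb (pvH grid) (pvW grid) r c = true → (r, c) ∉ V →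
      pvGet g r c = pvGet grid r c := by
  intro r c hinb hnv
  obtain ⟨h1, h2⟩ := inb_dims grid r c hinb hR
  rw [pvGet_eq_EntN, pvGet_eq_EntN]
  refine (hG.2.2 r.toNat c.toNat h1 h2).2 (fun hpa => hnv ?_)
  have hr0 : ((r.toNat : Int), (c.toNat : Int)) = (r, c) := by
    rw [inb_iff] at hinb
    rw [Prod.mk.injEq]
    omega
  exact hr0 ▸ hpa.2

theorem invG_entry5 (grid g : List (List Int)) (V : Finset (Int × Int))
    (hG : InvG grid g V) (hR : RowsOk grid) :
    ∀ r c, pvInb (pvH grid) (pvW grid) r c = true →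
      (pvGet g r c = 5 ↔ pvGet grid r c = 5) := by
  intro r c hinb
  obtain ⟨h1, h2⟩ := inb_dims grid r c hinb hR
  rw [pvGet_eq_EntN, pvGet_eq_EntN]
  obtain ⟨i1, i2⟩ := hG.2.2 r.toNat c.toNat h1 h2
  by_cases hpa : PaintedP grid ((r.toNat : Int), (c.toNat : Int)) ∧
      ((r.toNat : Int), (c.toNat : Int)) ∈ V
  · rw [i1 hpa]
    have hz := painted_zero grid _ hpa.1
    have hz2 := hz.2
    rw [pvGet_eq_EntN] at hz2
    simp only [Int.toNat_natCast] at hz2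
    constructor
    · intro hh
      exact absurd hh (by norm_num)
    · intro hh
      omega
  · rw [i2 hpa]


theorem box_card (C : List (Int × Int)) (hnd : C.Nodup) (r1 c1 r2 c2 : Int)
    (hb : r1 ≤ r2) (hc : c1 ≤ c2) (hchar : ∀ q, q ∈ C ↔ InBox r1 c1 r2 c2 q) :
    (C.length : Int) = (r2 - r1 + 1) * (c2 - c1 + 1) := by
  have hF : C.toFinset = Finset.Icc r1 r2 ×ˢ Finset.Icc c1 c2 := by
    apply Finset.ext
    intro q
    rw [List.mem_toFinset, hchar, Finset.mem_product, Finset.mem_Icc, Finset.mem_Icc, InBox]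
    tauto
  have hlen : C.length = C.toFinset.card := (List.toFinset_card_of_nodup hnd).symm
  rw [hlen, hF, Finset.card_product, Int.card_Icc, Int.card_Icc]
  have e1 : ((r2 + 1 - r1).toNat : Int) = r2 + 1 - r1 := Int.toNat_of_nonneg (by omega)
  have e2 : ((c2 + 1 - c1).toNat : Int) = c2 + 1 - c1 := Int.toNat_of_nonneg (by omega)
  push_cast
  rw [e1, e2]
  ring

-- ========== one step of A's scan preserves the invariants ==========

theorem stepA (grid : List (List Int)) (hR : RowsOk grid) (r c : Int)
    (hr1 : 0 ≤ r) (hr2 : r < pvH grid) (hc1 : 0 ≤ c) (hc2 : c < pvW grid)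
    (g : List (List Int)) (V : Finset (Int × Int))
    (hV : InvV grid V r c) (hG : InvG grid g V) :
    InvV grid (pvScanCell (pvH grid) (pvW grid) (g, V) r c).2 r (c + 1) ∧
    InvG grid (pvScanCell (pvH grid) (pvW grid) (g, V) r c).1
      (pvScanCell (pvH grid) (pvW grid) (g, V) r c).2 := by
  have hinb : pvInb (pvH grid) (pvW grid) r c = true := by
    rw [inb_iff]; exact ⟨hr1, hr2, hc1, hc2⟩
  have hfz := invG_entry_frozen grid g V hG hR
  have hcl := invV_closed grid V r c hV
  simp only [pvScanCell]
  by_cases hmem : (r, c) ∈ V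
  · have e : decide ((r, c) ∉ V) = false := by simp [hmem]
    have hgf : (pvGet g r c == 0 && decide ((r, c) ∉ V)) = false := by
      rw [e]; exact Bool.and_false _
    rw [if_neg (by rw [hgf]; exact Bool.false_ne_true)]
    refine ⟨?_, hG⟩
    intro q
    rw [hV q]
    constructor
    · rintro ⟨y, h1, h2, h3⟩
      exact ⟨y, h1, by dsimp only [ProcB] at h2 ⊢; omega, h3⟩
    · rintro ⟨y, h1, h2, h3⟩
      by_cases hy : y = (r, c)
      · subst hy
        exact (hV q).mp (invV_connClosed grid V r c hV _ q hmem h3)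
      · refine ⟨y, h1, ?_, h3⟩
        have hne : ¬ (y.1 = r ∧ y.2 = c) := fun hh => hy (Prod.ext_iff.mpr hh)
        dsimp only [ProcB] at h2 ⊢
        omega
  · by_cases hz : ZeroC grid (r, c)
    case neg =>
      have e0 : pvGet g r c = pvGet grid r c := hfz r c hinb hmem
      have e : (pvGet g r c == 0) = false := by
        simp only [beq_eq_false_iff_ne, ne_eq, e0]
        intro hh
        exact hz ⟨hinb, hh⟩
      have hgf : (pvGet g r c == 0 && decide ((r, c) ∉ V)) = false := by
        rw [e]; exact Bool.false_and _
      rw [if_neg (by rw [hgf]; exact Bool.false_ne_true)]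
      refine ⟨?_, hG⟩
      intro q
      rw [hV q]
      constructor
      · rintro ⟨y, h1, h2, h3⟩
        exact ⟨y, h1, by dsimp only [ProcB] at h2 ⊢; omega, h3⟩
      · rintro ⟨y, h1, h2, h3⟩
        by_cases hy : y = (r, c)
        · subst hy
          exact absurd h1 hz
        · refine ⟨y, h1, ?_, h3⟩
          have hne : ¬ (y.1 = r ∧ y.2 = c) := fun hh => hy (Prod.ext_iff.mpr hh)
          dsimp only [ProcB] at h2 ⊢
          omega
    case pos =>
      obtain ⟨C, heq, hnd, hseedC, hCzV, hchar, hclose⟩ :=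
        dfs_run grid g V (r, c) hfz hcl hz hmem
      have e1 : (pvGet g r c == 0) = true := by
        rw [beq_iff_eq, hfz r c hinb hmem]
        exact hz.2
      have e2 : decide ((r, c) ∉ V) = true := by simp [hmem]
      have hguard : (pvGet g r c == 0 && decide ((r, c) ∉ V)) = true := by
        rw [e1, e2]; rfl
      rw [if_pos hguard, heq]
      dsimp only
      have hlen : 0 < C.length := List.length_pos_of_mem hseedC
      rw [if_pos hlen]
      have hCne : C ≠ [] := List.ne_nil_of_length_pos hlen
      have hmapne1 : C.map (fun q => q.1) ≠ [] := by
        intro h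
        rw [List.map_eq_nil_iff] at h
        exact hCne h
      have hmapne2 : C.map (fun q => q.2) ≠ [] := by
        intro h
        rw [List.map_eq_nil_iff] at h
        exact hCne h
      obtain ⟨hmr_le, hmr_mem⟩ := minInt_spec (C.map (fun q => q.1)) hmapne1
      obtain ⟨hMr_le, hMr_mem⟩ := maxInt_spec (C.map (fun q => q.1)) hmapne1
      obtain ⟨hmc_le, hmc_mem⟩ := minInt_spec (C.map (fun q => q.2)) hmapne2
      obtain ⟨hMc_le, hMc_mem⟩ := maxInt_spec (C.map (fun q => q.2)) hmapne2
      set mr := (PySem.List.min? (C.map (fun q => q.1)) (fun x => x)).getD 0 with hmrdef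
      set Mr := (PySem.List.max? (C.map (fun q => q.1)) (fun x => x)).getD 0 with hMrdef
      set mc := (PySem.List.min? (C.map (fun q => q.2)) (fun x => x)).getD 0 with hmcdef
      set Mc := (PySem.List.max? (C.map (fun q => q.2)) (fun x => x)).getD 0 with hMcdef
      have hmrC : ∀ q ∈ C, mr ≤ q.1 := fun q hq => hmr_le q.1 (List.mem_map_of_mem hq)
      have hMrC : ∀ q ∈ C, q.1 ≤ Mr := fun q hq => hMr_le q.1 (List.mem_map_of_mem hq)
      have hmcC : ∀ q ∈ C, mc ≤ q.2 := fun q hq => hmc_le q.2 (List.mem_map_of_mem hq)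
      have hMcC : ∀ q ∈ C, q.2 ≤ Mc := fun q hq => hMc_le q.2 (List.mem_map_of_mem hq)
      have hmr_att : ∃ q ∈ C, q.1 = mr := by
        obtain ⟨q, hq, hq2⟩ := List.mem_map.mp hmr_mem
        exact ⟨q, hq, hq2⟩
      have hMr_att : ∃ q ∈ C, q.1 = Mr := by
        obtain ⟨q, hq, hq2⟩ := List.mem_map.mp hMr_mem
        exact ⟨q, hq, hq2⟩
      have hmc_att : ∃ q ∈ C, q.2 = mc := by
        obtain ⟨q, hq, hq2⟩ := List.mem_map.mp hmc_mem
        exact ⟨q, hq, hq2⟩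
      have hMc_att : ∃ q ∈ C, q.2 = Mc := by
        obtain ⟨q, hq, hq2⟩ := List.mem_map.mp hMc_mem
        exact ⟨q, hq, hq2⟩
      have hVsplit : ∀ x, x ∈ V ∪ C.toFinset ↔ x ∈ V ∨ x ∈ C := by
        intro x
        rw [Finset.mem_union, List.mem_toFinset]
      have hV' : InvV grid (V ∪ C.toFinset) r (c + 1) := by
        intro q
        rw [hVsplit]
        constructor
        · rintro (h | h)
          · obtain ⟨y, h1, h2, h3⟩ := (hV q).mp h
            exact ⟨y, h1, by dsimp only [ProcB] at h2 ⊢; omega, h3⟩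
          · exact ⟨(r, c), hz, by dsimp only [ProcB]; omega, (hchar q).mp h⟩
        · rintro ⟨y, h1, h2, h3⟩
          by_cases hy : y = (r, c)
          · subst hy
            exact Or.inr ((hchar q).mpr h3)
          · left
            apply (hV q).mpr
            refine ⟨y, h1, ?_, h3⟩
            have hne : ¬ (y.1 = r ∧ y.2 = c) := fun hh => hy (Prod.ext_iff.mpr hh)
            dsimp only [ProcB] at h2 ⊢
            omega
      have hsealC : ∀ (r1 c1 r2 c2 : Int), (∀ x, x ∈ C ↔ InBox r1 c1 r2 c2 x) →
          (∀ x x', InBox r1 c1 r2 c2 x → Off x x' → ¬ InBox r1 c1 r2 c2 x' →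
            ¬ ZeroC grid x') := by
        intro r1 c1 r2 c2 hbox x x' hx hoff hout hzx'
        have hxC : x ∈ C := (hbox x).mpr hx
        have hadj : Adj grid x x' := ⟨(hCzV x hxC).1, hzx', hoff⟩
        rcases hclose x hxC x' hadj with h | h
        · exact (hCzV x hxC).2 (hcl x' x h (adj_symm _ _ _ hadj))
        · exact hout ((hbox x').mp h)
      have hptd : ∀ q ∈ C, PaintedP grid q →
          ∃ r1 c1 r2 c2, GoodBox grid r1 c1 r2 c2 ∧ mr = r1 ∧ Mr = r2 ∧ mc = c1 ∧
            Mc = c2 ∧ (∀ x, x ∈ C ↔ InBox r1 c1 r2 c2 x) := by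
        intro q hq hp
        obtain ⟨r1, c1, r2, c2, hgb, hin⟩ := hp
        have hcq : Conn grid (r, c) q := (hchar q).mp hq
        have hboxR : ∀ x, x ∈ C ↔ InBox r1 c1 r2 c2 x := by
          intro x
          rw [hchar x, ← goodbox_comp grid r1 c1 r2 c2 hgb q hin x]
          constructor
          · intro h
            exact conn_trans _ _ _ _ (conn_symm _ _ _ hcq) h
          · intro h
            exact conn_trans _ _ _ _ hcq h
        have hco := box_coords C r1 c1 r2 c2 hboxR hgb.1 hgb.2.1 mr Mr mc Mc
          hmrC hMrC hmcC hMcC hmr_att hMr_att hmc_att hMc_att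
        exact ⟨r1, c1, r2, c2, hgb, hco.1, hco.2.1, hco.2.2.1, hco.2.2.2, hboxR⟩
      have hshould := should_eq grid g (invG_entry5 grid g V hG hR) mr mc Mr Mc
      split_ifs with harea hconv
      · -- area matches and the corner probe fires: the component is painted
        have hbox : ∀ x, x ∈ C ↔ InBox mr mc Mr Mc x := by
          apply comp_box_of_area C hnd hCne mr Mr mc Mc hmrC hMrC hmcC hMcC
          rwa [beq_iff_eq] at harea
        have hb1 : mr ≤ Mr := by
          obtain ⟨q0, hq0, he0⟩ := hmr_att
          have := hMrC q0 hq0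
          omega
        have hb2 : mc ≤ Mc := by
          obtain ⟨q0, hq0, he0⟩ := hmc_att
          have := hMcC q0 hq0
          omega
        have hgb : GoodBox grid mr mc Mr Mc :=
          ⟨hb1, hb2, fun x hx => (hCzV x ((hbox x).mpr hx)).1, hsealC mr mc Mr Mc hbox,
            by rw [← hshould]; exact hconv⟩
        refine ⟨hV', ?_, ?_, ?_⟩
        · rw [paint_fold_length]
          exact hG.1
        · intro i hi
          rw [paint_fold_rowlen]
          exact hG.2.1 i hi
        · intro i j hi hj
          have hCrange : ∀ q ∈ C, 0 ≤ q.1 ∧ 0 ≤ q.2 ∧ q.1.toNat < g.length ∧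
              q.2.toNat < (g.getD q.1.toNat []).length := by
            intro q hq
            have hzq := (hCzV q hq).1
            have hinbq := hzq.1
            obtain ⟨d1, d2⟩ := inb_dims grid q.1 q.2 hinbq hR
            rw [inb_iff] at hinbq
            refine ⟨hinbq.1, hinbq.2.2.1, ?_, ?_⟩
            · rw [hG.1]; exact d1
            · rw [hG.2.1 q.1.toNat d1]
              exact d2
          rw [paint_fold_entry C g hCrange i j]
          by_cases hcij : ((i : Int), (j : Int)) ∈ C
          · rw [if_pos hcij]
            constructor
            · intro _
              rfl
            · intro hnp
              exact absurd ⟨⟨mr, mc, Mr, Mc, hgb, (hbox _).mp hcij⟩,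
                (hVsplit _).mpr (Or.inr hcij)⟩ hnp
          · rw [if_neg hcij]
            have hiff : (PaintedP grid ((i : Int), (j : Int)) ∧
                ((i : Int), (j : Int)) ∈ V ∪ C.toFinset) ↔
                (PaintedP grid ((i : Int), (j : Int)) ∧ ((i : Int), (j : Int)) ∈ V) := by
              rw [hVsplit]
              constructor
              · rintro ⟨hp, (hv | hv)⟩
                · exact ⟨hp, hv⟩
                · exact absurd hv hcij
              · rintro ⟨hp, hv⟩
                exact ⟨hp, Or.inl hv⟩
            obtain ⟨o1, o2⟩ := hG.2.2 i j hi hj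
            exact ⟨fun hp => o1 (hiff.mp hp), fun hp => o2 (fun hh => hp (hiff.mpr hh))⟩
      · -- area matches but no corner probe fires: nothing in C is painted
        have hnp : ∀ q ∈ C, ¬ PaintedP grid q := by
          intro q hq hp
          obtain ⟨r1, c1, r2, c2, hgb, hco1, hco2, hco3, hco4, hboxR⟩ := hptd q hq hp
          apply hconv
          rw [hshould, hco1, hco3, hco2, hco4]
          exact hgb.2.2.2.2
        refine ⟨hV', hG.1, hG.2.1, ?_⟩
        intro i j hi hj
        obtain ⟨o1, o2⟩ := hG.2.2 i j hi hj
        have hiff : (PaintedP grid ((i : Int), (j : Int)) ∧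
            ((i : Int), (j : Int)) ∈ V ∪ C.toFinset) ↔
            (PaintedP grid ((i : Int), (j : Int)) ∧ ((i : Int), (j : Int)) ∈ V) := by
          rw [hVsplit]
          constructor
          · rintro ⟨hp, (hv | hv)⟩
            · exact ⟨hp, hv⟩
            · exact absurd hp (hnp _ hv)
          · rintro ⟨hp, hv⟩
            exact ⟨hp, Or.inl hv⟩
        exact ⟨fun hp => o1 (hiff.mp hp), fun hp => o2 (fun hh => hp (hiff.mpr hh))⟩
      · -- the component is not a rectangle: nothing in C is painted
        have hnp : ∀ q ∈ C, ¬ PaintedP grid q := by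
          intro q hq hp
          obtain ⟨r1, c1, r2, c2, hgb, hco1, hco2, hco3, hco4, hboxR⟩ := hptd q hq hp
          apply harea
          rw [beq_iff_eq]
          have hbc := box_card C hnd r1 c1 r2 c2 hgb.1 hgb.2.1 hboxR
          rw [hco1, hco2, hco3, hco4]
          exact hbc
        refine ⟨hV', hG.1, hG.2.1, ?_⟩
        intro i j hi hj
        obtain ⟨o1, o2⟩ := hG.2.2 i j hi hj
        have hiff : (PaintedP grid ((i : Int), (j : Int)) ∧
            ((i : Int), (j : Int)) ∈ V ∪ C.toFinset) ↔
            (PaintedP grid ((i : Int), (j : Int)) ∧ ((i : Int), (j : Int)) ∈ V) := by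
          rw [hVsplit]
          constructor
          · rintro ⟨hp, (hv | hv)⟩
            · exact ⟨hp, hv⟩
            · exact absurd hp (hnp _ hv)
          · rintro ⟨hp, hv⟩
            exact ⟨hp, Or.inl hv⟩
        exact ⟨fun hp => o1 (hiff.mp hp), fun hp => o2 (fun hh => hp (hiff.mpr hh))⟩

-- ========== folding A's scan over a row and over all rows ==========

theorem row_fold (grid : List (List Int)) (hR : RowsOk grid) (r : Int)
    (hr1 : 0 ≤ r) (hr2 : r < pvH grid) :
    ∀ (n : Nat) (c0 : Int), 0 ≤ c0 → (pvW grid - c0).toNat = n → c0 ≤ pvW grid →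
    ∀ g V, InvV grid V r c0 → InvG grid g V →
      InvV grid ((PySem.List.pyRange c0 (pvW grid) 1).foldl
          (fun st c => pvScanCell (pvH grid) (pvW grid) st r c) (g, V)).2 r (pvW grid) ∧
      InvG grid ((PySem.List.pyRange c0 (pvW grid) 1).foldl
          (fun st c => pvScanCell (pvH grid) (pvW grid) st r c) (g, V)).1
        ((PySem.List.pyRange c0 (pvW grid) 1).foldl
          (fun st c => pvScanCell (pvH grid) (pvW grid) st r c) (g, V)).2 := by
  intro n
  induction n with
  | zero =>
    intro c0 h0 hn hle g V hV hG
    have hc0 : c0 = pvW grid := by omega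
    rw [PySem.List.pyRange_one_eq_nil (by omega), List.foldl_nil]
    exact ⟨hc0 ▸ hV, hG⟩
  | succ k ih =>
    intro c0 h0 hn hle g V hV hG
    have hlt : c0 < pvW grid := by omega
    rw [PySem.List.pyRange_one_cons hlt, List.foldl_cons]
    have hstep := stepA grid hR r c0 hr1 hr2 h0 hlt g V hV hG
    exact ih (c0 + 1) (by omega) (by omega) (by omega)
      (pvScanCell (pvH grid) (pvW grid) (g, V) r c0).1
      (pvScanCell (pvH grid) (pvW grid) (g, V) r c0).2 hstep.1 hstep.2

theorem invV_rowend (grid : List (List Int)) (V : Finset (Int × Int)) (r : Int)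
    (hV : InvV grid V r (pvW grid)) : InvV grid V (r + 1) 0 := by
  intro q
  rw [hV q]
  constructor
  · rintro ⟨y, h1, h2, h3⟩
    refine ⟨y, h1, ?_, h3⟩
    have hh := h1.1
    rw [inb_iff] at hh
    dsimp only [ProcB] at h2 ⊢
    omega
  · rintro ⟨y, h1, h2, h3⟩
    refine ⟨y, h1, ?_, h3⟩
    have hh := h1.1
    rw [inb_iff] at hh
    dsimp only [ProcB] at h2 ⊢
    omega

theorem all_fold (grid : List (List Int)) (hR : RowsOk grid) :
    ∀ (n : Nat) (r0 : Int), 0 ≤ r0 → (pvH grid - r0).toNat = n → r0 ≤ pvH grid →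
    ∀ g V, InvV grid V r0 0 → InvG grid g V →
      InvV grid ((PySem.List.pyRange r0 (pvH grid) 1).foldl (fun st r =>
          (PySem.List.pyRange 0 (pvW grid) 1).foldl
            (fun st c => pvScanCell (pvH grid) (pvW grid) st r c) st) (g, V)).2
        (pvH grid) 0 ∧
      InvG grid ((PySem.List.pyRange r0 (pvH grid) 1).foldl (fun st r =>
          (PySem.List.pyRange 0 (pvW grid) 1).foldl
            (fun st c => pvScanCell (pvH grid) (pvW grid) st r c) st) (g, V)).1
        ((PySem.List.pyRange r0 (pvH grid) 1).foldl (fun st r =>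
          (PySem.List.pyRange 0 (pvW grid) 1).foldl
            (fun st c => pvScanCell (pvH grid) (pvW grid) st r c) st) (g, V)).2 := by
  intro n
  induction n with
  | zero =>
    intro r0 h0 hn hle g V hV hG
    have hr0 : r0 = pvH grid := by omega
    rw [show PySem.List.pyRange r0 (pvH grid) 1 = [] from
      PySem.List.pyRange_one_eq_nil (by omega), List.foldl_nil]
    exact ⟨hr0 ▸ hV, hG⟩
  | succ k ih =>
    intro r0 h0 hn hle g V hV hG
    have hlt : r0 < pvH grid := by omega
    rw [PySem.List.pyRange_one_cons hlt, List.foldl_cons]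
    have hWnn : (0 : Int) ≤ pvW grid := by
      have e : pvW grid = ((grid.headD []).length : Int) := rfl
      omega
    have hrow := row_fold grid hR r0 h0 hlt (pvW grid).toNat 0 le_rfl (by omega) hWnn
      g V hV hG
    exact ih (r0 + 1) (by omega) (by omega) (by omega) _ _
      (invV_rowend grid _ r0 hrow.1) hrow.2


theorem row_some (g : List (List Int)) (i : Nat) (hi : i < g.length) :
    g[i]? = some (g.getD i []) := by
  rw [getD_eq_getElem?_pv, List.getElem?_eq_getElem hi, Option.getD_some]

theorem ent_some (g : List (List Int)) (i j : Nat) (hj : j < (g.getD i []).length) :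
    (g.getD i [])[j]? = some (EntN g i j) := by
  unfold EntN
  rw [getD_eq_getElem?_pv (g.getD i []), List.getElem?_eq_getElem hj, Option.getD_some]

-- ===== VERDICT (by name: the statement is the Claim_ definition above) =====
theorem p_spec : Claim_equal_p := by
  unfold Claim_equal_p
  intro grid _ hpre
  unfold Spec_p
  have hR := rowsok_of_pre grid hpre
  have hV0 : InvV grid ∅ 0 0 := by
    intro q
    constructor
    · intro h
      simp at h
    · rintro ⟨y, h1, h2, _⟩
      have hh := h1.1
      rw [inb_iff] at hh
      dsimp only [ProcB] at h2
      omega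
  have hG0 : InvG grid grid ∅ := by
    refine ⟨rfl, fun i _ => rfl, ?_⟩
    intro i j hi hj
    constructor
    · rintro ⟨_, hmem⟩
      simp at hmem
    · intro _
      rfl
  have hHnn : (0 : Int) ≤ pvH grid := by
    have e : pvH grid = (grid.length : Int) := rfl
    omega
  obtain ⟨hVf, hGf⟩ := all_fold grid hR (pvH grid).toNat 0 le_rfl (by omega) hHnn
    grid ∅ hV0 hG0
  have eA : p grid = ((PySem.List.pyRange 0 (pvH grid) 1).foldl (fun st r =>
      (PySem.List.pyRange 0 (pvW grid) 1).foldl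
        (fun st c => pvScanCell (pvH grid) (pvW grid) st r c) st)
      (grid, (∅ : Finset (Int × Int)))).1 := rfl
  have eB : p_alt grid = (PySem.List.enumerate grid 0).map (fun rw =>
      (PySem.List.enumerate rw.2 0).map
        (fun cv => if (rw.1, cv.1) ∈ ((PySem.List.pyRange 0 (pvH grid) 1).foldl
            (fun P r => (PySem.List.pyRange 0 (pvW grid) 1).foldl
              (fun P c => pvCellStep grid (pvH grid) (pvW grid) P r c) P)
            (∅ : Finset (Int × Int))) then 4 else cv.2)) := rfl
  rw [eA, eB]
  apply List.ext_getElem?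
  intro i
  by_cases hi : i < grid.length
  case neg =>
    rw [List.getElem?_eq_none_iff.mpr (by
      rw [hGf.1]; omega)]
    rw [List.getElem?_eq_none_iff.mpr (by
      rw [List.length_map, PySem.List.length_enumerate]
      omega)]
  case pos =>
    rw [row_some _ i (by rw [hGf.1]; omega)]
    rw [List.getElem?_map, PySem.List.getElem?_enumerate, List.getElem?_eq_getElem hi]
    dsimp only [Option.map]
    apply congrArg some
    have hrlen : (((PySem.List.pyRange 0 (pvH grid) 1).foldl (fun st r =>
        (PySem.List.pyRange 0 (pvW grid) 1).foldl
          (fun st c => pvScanCell (pvH grid) (pvW grid) st r c) st)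
        (grid, (∅ : Finset (Int × Int)))).1.getD i []).length =
        (grid.getD i []).length := hGf.2.1 i hi
    have egG : grid.getD i [] = grid[i] := by
      rw [getD_eq_getElem?_pv, List.getElem?_eq_getElem hi, Option.getD_some]
    apply List.ext_getElem?
    intro j
    by_cases hjL : j < grid[i].length
    case neg =>
      rw [List.getElem?_eq_none_iff.mpr (by rw [hrlen, egG]; omega)]
      rw [List.getElem?_eq_none_iff.mpr (by
        rw [List.length_map, PySem.List.length_enumerate]; omega)]
    case pos =>
      rw [ent_some _ i j (by rw [hrlen, egG]; omega)]
      rw [List.getElem?_map, PySem.List.getElem?_enumerate, List.getElem?_eq_getElem hjL]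
      dsimp only [Option.map]
      apply congrArg some
      obtain ⟨o1, o2⟩ := hGf.2.2 i j hi (by rw [egG]; omega)
      simp only [zero_add]
      by_cases hp : PaintedP grid ((i : Int), (j : Int))
      · have hmemVf : ((i : Int), (j : Int)) ∈ ((PySem.List.pyRange 0 (pvH grid) 1).foldl
            (fun st r => (PySem.List.pyRange 0 (pvW grid) 1).foldl
              (fun st c => pvScanCell (pvH grid) (pvW grid) st r c) st)
            (grid, (∅ : Finset (Int × Int)))).2 := by
          apply (hVf ((i : Int), (j : Int))).mpr
          have hzq := painted_zero grid _ hp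
          refine ⟨((i : Int), (j : Int)), hzq, ?_, Relation.ReflTransGen.refl⟩
          have hh := hzq.1
          rw [inb_iff] at hh
          dsimp only [ProcB]
          omega
        rw [o1 ⟨hp, hmemVf⟩, if_pos ((mem_paint grid _).mpr hp)]
      · rw [o2 (fun hh => hp hh.1), if_neg (fun hm => hp ((mem_paint grid _).mp hm))]
        unfold EntN
        rw [egG, getD_eq_getElem?_pv, List.getElem?_eq_getElem hjL, Option.getD_some]
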